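-- pv_equiv track=rewrite | github.com/debdattasarkar/DSA | 2. GFG/0. All/1. Arrays/(M) 2D Difference Array/py_sol.py | applyDiff2D
-- ===== SOURCE A (Python) =====
-- def applyDiff2D(mat, opr):
--     # code here
--     n, m = len(mat), len(mat[0])
--
--     # Step 1: Create a difference matrix of size (n+2) x (m+2)
--     diff = [[0] * (m + 2) for _ in range(n + 2)]
--
--     # Step 2: Apply all operations to the difference matrix
--     for v, r1, c1, r2, c2 in opr:
--         diff[r1][c1] += v
--         diff[r1][c2 + 1] -= v
--         diff[r2 + 1][c1] -= v
--         diff[r2 + 1][c2 + 1] += v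
--
--     # Step 3: Compute prefix sum over rows
--     for i in range(n + 1):
--         for j in range(1, m + 1):
--             diff[i][j] += diff[i][j - 1]
--
--     # Step 4: Compute prefix sum over columns
--     for j in range(m + 1):
--         for i in range(1, n + 1):
--             diff[i][j] += diff[i - 1][j]
--
--     # Step 5: Update the original matrix with final values
--     for i in range(n):
--         for j in range(m):
--             mat[i][j] += diff[i][j]
--
--     return mat
-- ===== SOURCE B (Python) =====
-- def applyDiff2D(mat, opr):
--     n, m = len(mat), len(mat[0])
--     # drop each operation's four signed corner deltas into a padded grid
--     corner = [[0] * (m + 2) for _ in range(n + 2)]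
--     for v, r1, c1, r2, c2 in opr:
--         corner[r1][c1] += v
--         corner[r1][c2 + 1] -= v
--         corner[r2 + 1][c1] -= v
--         corner[r2 + 1][c2 + 1] += v
--     # one streaming pass: colacc[j] holds the column sum of rows 0..i,
--     # run the row-wise running total of colacc, i.e. the 2D prefix sum
--     colacc = [0] * m
--     for i in range(n):
--         row = mat[i]
--         run = 0
--         for j in range(m):
--             colacc[j] += corner[i][j]
--             run += colacc[j]
--             row[j] += run
--     return mat
-- ===== Notes on version B (the rewrite author's own statement) =====
-- stated objective: alternative
-- what changed: B keeps the corner-delta deposit but replaces A's two in-place prefix-sum passes over the padded grid plus a third add-back pass with a single streaming pass that maintains per-column running sums and a row running total, never mutating the delta grid.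
import Mathlib
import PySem

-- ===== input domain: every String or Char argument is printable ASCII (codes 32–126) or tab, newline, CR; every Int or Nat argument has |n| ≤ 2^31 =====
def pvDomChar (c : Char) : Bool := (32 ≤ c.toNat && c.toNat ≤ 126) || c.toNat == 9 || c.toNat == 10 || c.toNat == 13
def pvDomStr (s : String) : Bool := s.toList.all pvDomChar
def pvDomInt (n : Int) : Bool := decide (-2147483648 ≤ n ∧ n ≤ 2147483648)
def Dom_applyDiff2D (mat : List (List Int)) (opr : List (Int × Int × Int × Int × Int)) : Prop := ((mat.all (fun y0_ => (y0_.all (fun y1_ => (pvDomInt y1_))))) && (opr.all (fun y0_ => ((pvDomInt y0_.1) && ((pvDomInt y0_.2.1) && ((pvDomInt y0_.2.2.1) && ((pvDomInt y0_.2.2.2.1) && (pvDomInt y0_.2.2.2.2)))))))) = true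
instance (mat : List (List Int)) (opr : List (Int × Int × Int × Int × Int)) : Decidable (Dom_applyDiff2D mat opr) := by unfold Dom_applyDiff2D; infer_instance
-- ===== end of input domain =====

-- B keeps the corner-delta deposit but replaces A's two in-place prefix-sum passes and the
-- final add-back pass by one streaming pass with per-column running sums and a row running total
-- (alternative evaluation, same cost; A mutates mat in place, B does too; the equivalence is
-- about the returned value).


-- ===== PORT A =====
-- 'g[i][j] += dv' on a list-of-lists (Python in-place update, as a pure value)
def pvBump (g : List (List Int)) (i j dv : Int) : List (List Int) :=
  PySem.List.pySetD g i
    (PySem.List.pySetD (PySem.List.pyGetD g i []) j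
      (PySem.List.pyGetD (PySem.List.pyGetD g i []) j 0 + dv))

def applyDiff2D (mat : List (List Int)) (opr : List (Int × Int × Int × Int × Int)) : List (List Int) :=
  let n : Int := (mat.length : Int)
  let m : Int := ((PySem.List.pyGetD mat 0 []).length : Int)
  -- Step 1: difference matrix of size (n+2) x (m+2)
  let diff0 : List (List Int) :=
    List.replicate (mat.length + 2) (List.replicate ((PySem.List.pyGetD mat 0 []).length + 2) (0 : Int))
  -- Step 2: apply all operations to the difference matrix
  let diff1 := opr.foldl (fun g op =>
    match op with
    | (v, r1, c1, r2, c2) =>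
      pvBump (pvBump (pvBump (pvBump g r1 c1 v) r1 (c2 + 1) (-v)) (r2 + 1) c1 (-v)) (r2 + 1) (c2 + 1) v) diff0
  -- Step 3: prefix sum over rows
  let diff2 := (PySem.List.pyRange 0 (n + 1) 1).foldl (fun g i =>
    (PySem.List.pyRange 1 (m + 1) 1).foldl (fun g j =>
      pvBump g i j (PySem.List.pyGetD (PySem.List.pyGetD g i []) (j - 1) 0)) g) diff1
  -- Step 4: prefix sum over columns
  let diff3 := (PySem.List.pyRange 0 (m + 1) 1).foldl (fun g j =>
    (PySem.List.pyRange 1 (n + 1) 1).foldl (fun g i =>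
      pvBump g i j (PySem.List.pyGetD (PySem.List.pyGetD g (i - 1) []) j 0)) g) diff2
  -- Step 5: update the original matrix
  (PySem.List.pyRange 0 n 1).foldl (fun acc i =>
    (PySem.List.pyRange 0 m 1).foldl (fun acc j =>
      pvBump acc i j (PySem.List.pyGetD (PySem.List.pyGetD diff3 i []) j 0)) acc) mat

-- ===== PORT B =====
-- loop body of B's streaming pass: state ((mat-so-far, colacc), run), column index j
def bStep (D : List (List Int)) (i : Int) (st : (List (List Int) × List Int) × Int) (j : Int) :
    (List (List Int) × List Int) × Int :=
  let colacc := PySem.List.pySetD st.1.2 j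
    (PySem.List.pyGetD st.1.2 j 0 + PySem.List.pyGetD (PySem.List.pyGetD D i []) j 0)
  let run := st.2 + PySem.List.pyGetD colacc j 0
  ((pvBump st.1.1 i j run, colacc), run)

def applyDiff2D_alt (mat : List (List Int)) (opr : List (Int × Int × Int × Int × Int)) : List (List Int) :=
  let n : Int := (mat.length : Int)
  let m : Int := ((PySem.List.pyGetD mat 0 []).length : Int)
  -- drop each operation's four signed corner deltas into a padded grid
  let corner : List (List Int) := opr.foldl (fun g op =>
    match op with
    | (v, r1, c1, r2, c2) =>
      pvBump (pvBump (pvBump (pvBump g r1 c1 v) r1 (c2 + 1) (-v)) (r2 + 1) c1 (-v)) (r2 + 1) (c2 + 1) v)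
    (List.replicate (mat.length + 2) (List.replicate ((PySem.List.pyGetD mat 0 []).length + 2) (0 : Int)))
  -- one streaming pass: colacc[j] = column sum of rows 0..i, run = row-wise running total
  ((PySem.List.pyRange 0 n 1).foldl (fun st i =>
      ((PySem.List.pyRange 0 m 1).foldl (bStep corner i) (st, 0)).1)
    (mat, List.replicate ((PySem.List.pyGetD mat 0 []).length) (0 : Int))).1

-- ===== PRECONDITION & SPEC =====
-- Pre_ is exactly the inputs on which A returns: a nonempty matrix whose rows are at least as
-- long as row 0 (else step 5 raises IndexError), and every operation's four difference-matrix
-- indices r1, r2+1 (resp. c1, c2+1) within Python list-index range of the padded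
-- (n+2)-row (resp. (m+2)-column) grid (else step 2 raises IndexError).
def Pre_applyDiff2D (mat : List (List Int)) (opr : List (Int × Int × Int × Int × Int)) : Prop :=
  mat ≠ [] ∧ (∀ row ∈ mat, (PySem.List.pyGetD mat 0 []).length ≤ row.length) ∧
  ∀ op ∈ opr,
    -((mat.length : Int) + 2) ≤ op.2.1 ∧ op.2.1 < (mat.length : Int) + 2 ∧
    -((mat.length : Int) + 2) ≤ op.2.2.2.1 + 1 ∧ op.2.2.2.1 + 1 < (mat.length : Int) + 2 ∧
    -(((PySem.List.pyGetD mat 0 []).length : Int) + 2) ≤ op.2.2.1 ∧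
    op.2.2.1 < ((PySem.List.pyGetD mat 0 []).length : Int) + 2 ∧
    -(((PySem.List.pyGetD mat 0 []).length : Int) + 2) ≤ op.2.2.2.2 + 1 ∧
    op.2.2.2.2 + 1 < ((PySem.List.pyGetD mat 0 []).length : Int) + 2
instance (mat : List (List Int)) (opr : List (Int × Int × Int × Int × Int)) : Decidable (Pre_applyDiff2D mat opr) := by unfold Pre_applyDiff2D; infer_instance

def pvWitness_applyDiff2D : List (List Int) × (List (Int × Int × Int × Int × Int)) :=
  ([[1, 2], [3, 4]], [(5, 0, 0, 1, 1), (2, 0, 1, 0, 1)])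

def Spec_applyDiff2D (mat : List (List Int)) (opr : List (Int × Int × Int × Int × Int)) (out : List (List Int)) : Prop := out = applyDiff2D_alt mat opr
instance (mat : List (List Int)) (opr : List (Int × Int × Int × Int × Int)) (out : List (List Int)) : Decidable (Spec_applyDiff2D mat opr out) := by unfold Spec_applyDiff2D; infer_instance

-- ===== CLAIM (what is proved, stated in full; the proofs are below) =====
def Claim_equal_applyDiff2D : Prop := ∀ (mat : List (List Int)) (opr : List (Int × Int × Int × Int × Int)), Dom_applyDiff2D mat opr → Pre_applyDiff2D mat opr → Spec_applyDiff2D mat opr (applyDiff2D mat opr)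

-- ===== LEMMAS AND PROOFS =====

-- cell (k,l) of a list-of-lists, 0 outside
def gget (g : List (List Int)) (k l : Nat) : Int := (g.getD k []).getD l 0

-- same outer length and same row lengths
def sameShape (g h : List (List Int)) : Prop :=
  g.length = h.length ∧ ∀ k : Nat, (g.getD k []).length = (h.getD k []).length

-- value one clipped quadrant combination (A's difference scheme, after both prefix passes)
-- contributes to cell (k,l)
def qcontrib (n m : Nat) (op : Int × Int × Int × Int × Int) (k l : Nat) : Int :=
  (if PySem.Int.mod op.2.1 ((n + 2 : Nat) : Int) ≤ (k : Int) ∧ (k : Int) < (n : Int) ∧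
      PySem.Int.mod op.2.2.1 ((m + 2 : Nat) : Int) ≤ (l : Int) ∧ (l : Int) < (m : Int) then op.1 else 0)
  + (if PySem.Int.mod op.2.1 ((n + 2 : Nat) : Int) ≤ (k : Int) ∧ (k : Int) < (n : Int) ∧
      PySem.Int.mod (op.2.2.2.2 + 1) ((m + 2 : Nat) : Int) ≤ (l : Int) ∧ (l : Int) < (m : Int) then -op.1 else 0)
  + (if PySem.Int.mod (op.2.2.2.1 + 1) ((n + 2 : Nat) : Int) ≤ (k : Int) ∧ (k : Int) < (n : Int) ∧
      PySem.Int.mod op.2.2.1 ((m + 2 : Nat) : Int) ≤ (l : Int) ∧ (l : Int) < (m : Int) then -op.1 else 0)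
  + (if PySem.Int.mod (op.2.2.2.1 + 1) ((n + 2 : Nat) : Int) ≤ (k : Int) ∧ (k : Int) < (n : Int) ∧
      PySem.Int.mod (op.2.2.2.2 + 1) ((m + 2 : Nat) : Int) ≤ (l : Int) ∧ (l : Int) < (m : Int) then op.1 else 0)

def oprSum (n m : Nat) (opr : List (Int × Int × Int × Int × Int)) (k l : Nat) : Int :=
  (opr.map (fun op => qcontrib n m op k l)).sum

-- the four (wrapped) corner deltas an operation writes into A's (N x W) difference matrix
def delta (N W : Nat) (op : Int × Int × Int × Int × Int) (k l : Nat) : Int :=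
  (if (k : Int) = PySem.Int.mod op.2.1 (N : Int) ∧ (l : Int) = PySem.Int.mod op.2.2.1 (W : Int) then op.1 else 0)
  + (if (k : Int) = PySem.Int.mod op.2.1 (N : Int) ∧ (l : Int) = PySem.Int.mod (op.2.2.2.2 + 1) (W : Int) then -op.1 else 0)
  + (if (k : Int) = PySem.Int.mod (op.2.2.2.1 + 1) (N : Int) ∧ (l : Int) = PySem.Int.mod op.2.2.1 (W : Int) then -op.1 else 0)
  + (if (k : Int) = PySem.Int.mod (op.2.2.2.1 + 1) (N : Int) ∧ (l : Int) = PySem.Int.mod (op.2.2.2.2 + 1) (W : Int) then op.1 else 0)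

def deltaSum (N W : Nat) (opr : List (Int × Int × Int × Int × Int)) (k l : Nat) : Int :=
  (opr.map (fun op => delta N W op k l)).sum

-- the (unclipped) double prefix sum of delta
def dsum (N W : Nat) (op : Int × Int × Int × Int × Int) (k l : Nat) : Int :=
  (if PySem.Int.mod op.2.1 (N : Int) ≤ (k : Int) ∧ PySem.Int.mod op.2.2.1 (W : Int) ≤ (l : Int) then op.1 else 0)
  + (if PySem.Int.mod op.2.1 (N : Int) ≤ (k : Int) ∧ PySem.Int.mod (op.2.2.2.2 + 1) (W : Int) ≤ (l : Int) then -op.1 else 0)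
  + (if PySem.Int.mod (op.2.2.2.1 + 1) (N : Int) ≤ (k : Int) ∧ PySem.Int.mod op.2.2.1 (W : Int) ≤ (l : Int) then -op.1 else 0)
  + (if PySem.Int.mod (op.2.2.2.1 + 1) (N : Int) ≤ (k : Int) ∧ PySem.Int.mod (op.2.2.2.2 + 1) (W : Int) ≤ (l : Int) then op.1 else 0)

-- row-prefix of f up to index t inclusive
def pref (f : Nat → Int) (t : Nat) : Int := ((List.range (t + 1)).map f).sum

theorem sameShape_refl (g : List (List Int)) : sameShape g g := ⟨rfl, fun _ => rfl⟩

theorem sameShape_trans {g h k : List (List Int)} (h1 : sameShape g h) (h2 : sameShape h k) : sameShape g k :=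
  ⟨h1.1.trans h2.1, fun n => (h1.2 n).trans (h2.2 n)⟩

theorem getD_set {α : Type} (xs : List α) (n m : Nat) (a d : α) :
    (xs.set n a).getD m d = if m = n ∧ n < xs.length then a else xs.getD m d := by
  rw [List.getD_eq_getElem?_getD, List.getD_eq_getElem?_getD, List.getElem?_set]
  split_ifs with h1 h2 h3 h4 <;> simp_all

theorem pvBump_eq_set (g : List (List Int)) (i j dv : Int) (hi : 0 ≤ i) (hj : 0 ≤ j) :
    pvBump g i j dv = g.set i.toNat
      ((g.getD i.toNat []).set j.toNat ((g.getD i.toNat []).getD j.toNat 0 + dv)) := by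
  unfold pvBump
  rw [PySem.List.pySetD_of_nonneg _ _ hi, PySem.List.pySetD_of_nonneg _ _ hj,
    PySem.List.pyGetD_of_nonneg _ _ hi, PySem.List.pyGetD_of_nonneg _ _ hj]

theorem length_pvBump (g : List (List Int)) (i j dv : Int) (hi : 0 ≤ i) :
    (pvBump g i j dv).length = g.length := by
  unfold pvBump
  rw [PySem.List.pySetD_of_nonneg _ _ hi]
  exact List.length_set ..

theorem rowlen_pvBump (g : List (List Int)) (i j dv : Int) (hi : 0 ≤ i) (hj : 0 ≤ j) (k : Nat) :
    ((pvBump g i j dv).getD k []).length = (g.getD k []).length := by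
  rw [pvBump_eq_set g i j dv hi hj, getD_set]
  split_ifs with h
  · rw [h.1, List.length_set]
  · rfl

theorem sameShape_pvBump (g : List (List Int)) (i j dv : Int) (hi : 0 ≤ i) (hj : 0 ≤ j) :
    sameShape (pvBump g i j dv) g :=
  ⟨length_pvBump g i j dv hi, rowlen_pvBump g i j dv hi hj⟩

-- the central cell equation for pvBump, in-range additive form
theorem gget_pvBump (g : List (List Int)) (i j dv : Int) (hi : 0 ≤ i) (hj : 0 ≤ j)
    (hi2 : i < (g.length : Int)) (hj2 : j < ((g.getD i.toNat []).length : Int)) (k l : Nat) :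
    gget (pvBump g i j dv) k l = gget g k l + (if (k : Int) = i ∧ (l : Int) = j then dv else 0) := by
  unfold gget
  rw [pvBump_eq_set g i j dv hi hj, getD_set]
  by_cases hk : k = i.toNat ∧ i.toNat < g.length
  · rw [if_pos hk, hk.1, getD_set]
    by_cases hl : l = j.toNat ∧ j.toNat < (g.getD i.toNat []).length
    · rw [if_pos hl, hl.1, if_pos ⟨by omega, by omega⟩]
    · rw [if_neg hl, if_neg (by omega), add_zero]
  · rw [if_neg hk, if_neg (by omega), add_zero]

-- ---- A side ----

-- sum over a range of a one-point indicator
theorem sum_indicator (a c : Int) (K : Nat) :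
    ((List.range K).map (fun (k : Nat) => if (k : Int) = a then c else 0)).sum
      = if 0 ≤ a ∧ a < (K : Int) then c else 0 := by
  induction K with
  | zero => rw [if_neg (by omega)]; simp
  | succ K ih =>
    rw [List.range_succ, List.map_append, List.sum_append, ih]
    simp only [List.map_cons, List.map_nil, List.sum_cons, List.sum_nil]
    split_ifs <;> omega

theorem double_sum_indicator (a b c : Int) (K L : Nat) :
    ((List.range K).map (fun (k : Nat) =>
      ((List.range L).map (fun (l : Nat) => if (k : Int) = a ∧ (l : Int) = b then c else 0)).sum)).sum
      = if 0 ≤ a ∧ a < (K : Int) ∧ 0 ≤ b ∧ b < (L : Int) then c else 0 := by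
  have hin : ∀ k : Nat, ((List.range L).map (fun (l : Nat) => if (k : Int) = a ∧ (l : Int) = b then c else 0)).sum
      = if (k : Int) = a then (if 0 ≤ b ∧ b < (L : Int) then c else 0) else 0 := by
    intro k
    by_cases h : (k : Int) = a
    · rw [if_pos h, ← sum_indicator b c L]
      exact congrArg List.sum (List.map_congr_left (fun l _ => by rw [h]; simp))
    · rw [if_neg h]
      have : ∀ l : Nat, (if (k : Int) = a ∧ (l : Int) = b then c else 0) = 0 := by
        intro l; rw [if_neg (by tauto)]
      simp [this]
  calc ((List.range K).map (fun (k : Nat) =>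
      ((List.range L).map (fun (l : Nat) => if (k : Int) = a ∧ (l : Int) = b then c else 0)).sum)).sum
      = ((List.range K).map (fun (k : Nat) =>
        if (k : Int) = a then (if 0 ≤ b ∧ b < (L : Int) then c else 0) else 0)).sum := by
        exact congrArg List.sum (List.map_congr_left (fun k _ => hin k))
    _ = if 0 ≤ a ∧ a < (K : Int) then (if 0 ≤ b ∧ b < (L : Int) then c else 0) else 0 := sum_indicator ..
    _ = if 0 ≤ a ∧ a < (K : Int) ∧ 0 ≤ b ∧ b < (L : Int) then c else 0 := by split_ifs <;> omega

-- the double prefix sum of delta is dsum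
theorem delta_prefix (N W : Nat) (hN : 0 < N) (hW : 0 < W) (op : Int × Int × Int × Int × Int) (k l : Nat) :
    ((List.range (k + 1)).map (fun (k' : Nat) =>
      ((List.range (l + 1)).map (fun (l' : Nat) => delta N W op k' l')).sum)).sum = dsum N W op k l := by
  obtain ⟨v, r1, c1, r2, c2⟩ := op
  have hNi : (0 : Int) < (N : Int) := by exact_mod_cast hN
  have hWi : (0 : Int) < (W : Int) := by exact_mod_cast hW
  have hR1 := PySem.Int.mod_nonneg r1 hNi
  have hR2 := PySem.Int.mod_nonneg (r2 + 1) hNi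
  have hC1 := PySem.Int.mod_nonneg c1 hWi
  have hC2 := PySem.Int.mod_nonneg (c2 + 1) hWi
  simp only [delta, dsum]
  calc ((List.range (k + 1)).map (fun (k' : Nat) => ((List.range (l + 1)).map (fun (l' : Nat) =>
        (if (k' : Int) = PySem.Int.mod r1 (N : Int) ∧ (l' : Int) = PySem.Int.mod c1 (W : Int) then v else 0)
        + (if (k' : Int) = PySem.Int.mod r1 (N : Int) ∧ (l' : Int) = PySem.Int.mod (c2 + 1) (W : Int) then -v else 0)
        + (if (k' : Int) = PySem.Int.mod (r2 + 1) (N : Int) ∧ (l' : Int) = PySem.Int.mod c1 (W : Int) then -v else 0)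
        + (if (k' : Int) = PySem.Int.mod (r2 + 1) (N : Int) ∧ (l' : Int) = PySem.Int.mod (c2 + 1) (W : Int) then v else 0))).sum)).sum
      = ((List.range (k + 1)).map (fun (k' : Nat) =>
          ((List.range (l + 1)).map (fun (l' : Nat) => if (k' : Int) = PySem.Int.mod r1 (N : Int) ∧ (l' : Int) = PySem.Int.mod c1 (W : Int) then v else 0)).sum
          + ((List.range (l + 1)).map (fun (l' : Nat) => if (k' : Int) = PySem.Int.mod r1 (N : Int) ∧ (l' : Int) = PySem.Int.mod (c2 + 1) (W : Int) then -v else 0)).sum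
          + ((List.range (l + 1)).map (fun (l' : Nat) => if (k' : Int) = PySem.Int.mod (r2 + 1) (N : Int) ∧ (l' : Int) = PySem.Int.mod c1 (W : Int) then -v else 0)).sum
          + ((List.range (l + 1)).map (fun (l' : Nat) => if (k' : Int) = PySem.Int.mod (r2 + 1) (N : Int) ∧ (l' : Int) = PySem.Int.mod (c2 + 1) (W : Int) then v else 0)).sum)).sum := by
        refine congrArg List.sum (List.map_congr_left (fun (k' : Nat) _ => ?_))
        simp only [PySem.List.sum_map_add_int]
    _ = ((List.range (k + 1)).map (fun (k' : Nat) =>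
          ((List.range (l + 1)).map (fun (l' : Nat) => if (k' : Int) = PySem.Int.mod r1 (N : Int) ∧ (l' : Int) = PySem.Int.mod c1 (W : Int) then v else 0)).sum)).sum
        + ((List.range (k + 1)).map (fun (k' : Nat) =>
          ((List.range (l + 1)).map (fun (l' : Nat) => if (k' : Int) = PySem.Int.mod r1 (N : Int) ∧ (l' : Int) = PySem.Int.mod (c2 + 1) (W : Int) then -v else 0)).sum)).sum
        + ((List.range (k + 1)).map (fun (k' : Nat) =>
          ((List.range (l + 1)).map (fun (l' : Nat) => if (k' : Int) = PySem.Int.mod (r2 + 1) (N : Int) ∧ (l' : Int) = PySem.Int.mod c1 (W : Int) then -v else 0)).sum)).sum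
        + ((List.range (k + 1)).map (fun (k' : Nat) =>
          ((List.range (l + 1)).map (fun (l' : Nat) => if (k' : Int) = PySem.Int.mod (r2 + 1) (N : Int) ∧ (l' : Int) = PySem.Int.mod (c2 + 1) (W : Int) then v else 0)).sum)).sum := by
        simp only [PySem.List.sum_map_add_int]
    _ = (if 0 ≤ PySem.Int.mod r1 (N : Int) ∧ PySem.Int.mod r1 (N : Int) < ((k + 1 : Nat) : Int) ∧ 0 ≤ PySem.Int.mod c1 (W : Int) ∧ PySem.Int.mod c1 (W : Int) < ((l + 1 : Nat) : Int) then v else 0)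
        + (if 0 ≤ PySem.Int.mod r1 (N : Int) ∧ PySem.Int.mod r1 (N : Int) < ((k + 1 : Nat) : Int) ∧ 0 ≤ PySem.Int.mod (c2 + 1) (W : Int) ∧ PySem.Int.mod (c2 + 1) (W : Int) < ((l + 1 : Nat) : Int) then -v else 0)
        + (if 0 ≤ PySem.Int.mod (r2 + 1) (N : Int) ∧ PySem.Int.mod (r2 + 1) (N : Int) < ((k + 1 : Nat) : Int) ∧ 0 ≤ PySem.Int.mod c1 (W : Int) ∧ PySem.Int.mod c1 (W : Int) < ((l + 1 : Nat) : Int) then -v else 0)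
        + (if 0 ≤ PySem.Int.mod (r2 + 1) (N : Int) ∧ PySem.Int.mod (r2 + 1) (N : Int) < ((k + 1 : Nat) : Int) ∧ 0 ≤ PySem.Int.mod (c2 + 1) (W : Int) ∧ PySem.Int.mod (c2 + 1) (W : Int) < ((l + 1 : Nat) : Int) then v else 0) := by
        rw [double_sum_indicator, double_sum_indicator, double_sum_indicator, double_sum_indicator]
    _ = (if PySem.Int.mod r1 (N : Int) ≤ (k : Int) ∧ PySem.Int.mod c1 (W : Int) ≤ (l : Int) then v else 0)
        + (if PySem.Int.mod r1 (N : Int) ≤ (k : Int) ∧ PySem.Int.mod (c2 + 1) (W : Int) ≤ (l : Int) then -v else 0)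
        + (if PySem.Int.mod (r2 + 1) (N : Int) ≤ (k : Int) ∧ PySem.Int.mod c1 (W : Int) ≤ (l : Int) then -v else 0)
        + (if PySem.Int.mod (r2 + 1) (N : Int) ≤ (k : Int) ∧ PySem.Int.mod (c2 + 1) (W : Int) ≤ (l : Int) then v else 0) := by
        push_cast
        congr 1
        congr 1
        congr 1
        all_goals split_ifs <;> omega

-- uniform shape: N rows, each of length W
def Unif (g : List (List Int)) (N W : Nat) : Prop :=
  g.length = N ∧ ∀ k : Nat, k < N → (g.getD k []).length = W

theorem Unif_pvBump {g : List (List Int)} {N W : Nat} (hg : Unif g N W) (i j dv : Int)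
    (hi : 0 ≤ i) (hj : 0 ≤ j) : Unif (pvBump g i j dv) N W :=
  ⟨(length_pvBump g i j dv hi).trans hg.1,
   fun k hk => (rowlen_pvBump g i j dv hi hj k).trans (hg.2 k hk)⟩

theorem Unif_replicate (N W : Nat) : Unif (List.replicate N (List.replicate W (0 : Int))) N W := by
  refine ⟨List.length_replicate, fun k hk => ?_⟩
  rw [List.getD_eq_getElem _ _ (by simpa using hk), List.getElem_replicate, List.length_replicate]

theorem gget_replicate (N W k l : Nat) : gget (List.replicate N (List.replicate W (0 : Int))) k l = 0 := by
  unfold gget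
  rw [List.getD_eq_getElem?_getD, List.getD_eq_getElem?_getD, List.getElem?_replicate]
  split_ifs with h <;> simp [List.getElem?_replicate] <;> split_ifs <;> rfl

theorem pref_succ (f : Nat → Int) (t : Nat) : pref f (t + 1) = pref f t + f (t + 1) := by
  unfold pref; rw [List.range_succ]; simp

theorem pref_add (f g : Nat → Int) (t : Nat) :
    pref (fun x => f x + g x) t = pref f t + pref g t := PySem.List.sum_map_add_int ..

theorem pref_congr {f g : Nat → Int} {t : Nat} (h : ∀ x ≤ t, f x = g x) : pref f t = pref g t := by
  unfold pref
  exact congrArg List.sum (List.map_congr_left (fun x hx => h x (by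
    have := List.mem_range.mp hx; omega)))

theorem pref_zero_fn (t : Nat) : pref (fun _ => (0 : Int)) t = 0 := by
  unfold pref; simp

-- the Python mod of a one-wrap index, explicitly
theorem pymod_small (L i : Int) (hL : 0 < L) (h1 : -L ≤ i) (h2 : i < L) :
    PySem.Int.mod i L = if 0 ≤ i then i else i + L := by
  rw [PySem.Int.mod_eq_emod_of_pos hL]
  split_ifs with h
  · exact Int.emod_eq_of_lt h h2
  · rw [Int.emod_eq_add_self_emod]
    exact Int.emod_eq_of_lt (by omega) (by omega)

-- Python index resolution with wraparound, as a mod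
theorem pyIdx_wrap (L : Nat) (i : Int) (h1 : -(L : Int) ≤ i) (h2 : i < (L : Int)) :
    PySem.List.pyIdx? L i = some (PySem.Int.mod i (L : Int)).toNat := by
  have hL : (0 : Int) < (L : Int) := by omega
  rw [pymod_small (L : Int) i hL h1 h2]
  unfold PySem.List.pyIdx?
  split_ifs <;> first | (exact congrArg some (by omega)) | (exfalso; omega)

theorem pySetD_wrap {α : Type} (xs : List α) (i : Int) (v : α)
    (h1 : -(xs.length : Int) ≤ i) (h2 : i < (xs.length : Int)) :
    PySem.List.pySetD xs i v = PySem.List.pySetD xs (PySem.Int.mod i (xs.length : Int)) v := by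
  have hL : (0 : Int) < (xs.length : Int) := by omega
  have hm1 := PySem.Int.mod_nonneg i hL
  have hm2 := PySem.Int.mod_lt i hL
  have hmm : PySem.Int.mod (PySem.Int.mod i (xs.length : Int)) (xs.length : Int)
      = PySem.Int.mod i (xs.length : Int) := by
    rw [pymod_small (xs.length : Int) _ hL (by omega) hm2, if_pos hm1]
  unfold PySem.List.pySetD PySem.List.pySet?
  rw [pyIdx_wrap _ _ h1 h2, pyIdx_wrap _ _ (by omega) (by omega), hmm]

theorem pyGetD_wrap {α : Type} (xs : List α) (i : Int) (d : α)
    (h1 : -(xs.length : Int) ≤ i) (h2 : i < (xs.length : Int)) :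
    PySem.List.pyGetD xs i d = PySem.List.pyGetD xs (PySem.Int.mod i (xs.length : Int)) d := by
  have hL : (0 : Int) < (xs.length : Int) := by omega
  have hm1 := PySem.Int.mod_nonneg i hL
  have hm2 := PySem.Int.mod_lt i hL
  have hmm : PySem.Int.mod (PySem.Int.mod i (xs.length : Int)) (xs.length : Int)
      = PySem.Int.mod i (xs.length : Int) := by
    rw [pymod_small (xs.length : Int) _ hL (by omega) hm2, if_pos hm1]
  unfold PySem.List.pyGetD PySem.List.pyGet?
  rw [pyIdx_wrap _ _ h1 h2, pyIdx_wrap _ _ (by omega) (by omega), hmm]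

-- pvBump at a possibly-negative (wrapping) index equals pvBump at the wrapped index
theorem pvBump_wrap (g : List (List Int)) (i j dv : Int)
    (h1 : -(g.length : Int) ≤ i) (h2 : i < (g.length : Int))
    (h3 : -(((g.getD (PySem.Int.mod i (g.length : Int)).toNat []).length : Int)) ≤ j)
    (h4 : j < ((g.getD (PySem.Int.mod i (g.length : Int)).toNat []).length : Int)) :
    pvBump g i j dv = pvBump g (PySem.Int.mod i (g.length : Int))
      (PySem.Int.mod j ((g.getD (PySem.Int.mod i (g.length : Int)).toNat []).length : Int)) dv := by
  have hL : (0 : Int) < (g.length : Int) := by omega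
  have hm1 := PySem.Int.mod_nonneg i hL
  have hrow : PySem.List.pyGetD g i [] = g.getD (PySem.Int.mod i (g.length : Int)).toNat [] := by
    rw [pyGetD_wrap g i [] h1 h2, PySem.List.pyGetD_of_nonneg _ _ hm1]
  unfold pvBump
  rw [pySetD_wrap g i _ h1 h2, hrow,
    pySetD_wrap (g.getD (PySem.Int.mod i (g.length : Int)).toNat []) j _ (by omega) (by omega),
    pyGetD_wrap (g.getD (PySem.Int.mod i (g.length : Int)).toNat []) j 0 (by omega) (by omega),
    PySem.List.pyGetD_of_nonneg g [] hm1]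

-- cell equation for a (possibly wrapping) bump on a uniform matrix
theorem gget_pvBump_mod (N W : Nat) (g : List (List Int)) (hg : Unif g N W) (i j dv : Int)
    (hiN : -(N : Int) ≤ i ∧ i < (N : Int)) (hjW : -(W : Int) ≤ j ∧ j < (W : Int)) :
    Unif (pvBump g i j dv) N W ∧ ∀ k l : Nat,
      gget (pvBump g i j dv) k l = gget g k l +
        (if (k : Int) = PySem.Int.mod i (N : Int) ∧ (l : Int) = PySem.Int.mod j (W : Int) then dv else 0) := by
  have hNi : (0 : Int) < (N : Int) := by omega
  have hWi : (0 : Int) < (W : Int) := by omega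
  have hgl : ((g.length : Nat) : Int) = (N : Int) := by exact_mod_cast hg.1
  have hmodN : PySem.Int.mod i (g.length : Int) = PySem.Int.mod i (N : Int) := by rw [hgl]
  have hm1 := PySem.Int.mod_nonneg i hNi
  have hm2 := PySem.Int.mod_lt i hNi
  have hrl : (g.getD (PySem.Int.mod i (N : Int)).toNat []).length = W :=
    hg.2 (PySem.Int.mod i (N : Int)).toNat (by omega)
  have hrli : ((g.getD (PySem.Int.mod i (N : Int)).toNat []).length : Int) = (W : Int) := by
    exact_mod_cast hrl
  have hwrap := pvBump_wrap g i j dv (by omega) (by omega)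
    (by rw [hmodN, hrli]; omega) (by rw [hmodN, hrli]; omega)
  rw [hmodN, hrli] at hwrap
  rw [hwrap]
  have hm3 := PySem.Int.mod_nonneg j hWi
  have hm4 := PySem.Int.mod_lt j hWi
  constructor
  · exact Unif_pvBump hg _ _ dv (by omega) (by omega)
  · intro k l
    exact gget_pvBump g (PySem.Int.mod i (N : Int)) (PySem.Int.mod j (W : Int)) dv
      (by omega) (by omega) (by omega) (by rw [hrli]; omega) k l

-- Step 2 loop: the operations write their (wrapped) corner deltas
theorem A_opsLoop (N W : Nat) (ops : List (Int × Int × Int × Int × Int))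
    (hops : ∀ op ∈ ops, -(N : Int) ≤ op.2.1 ∧ op.2.1 < (N : Int) ∧
      -(N : Int) ≤ op.2.2.2.1 + 1 ∧ op.2.2.2.1 + 1 < (N : Int) ∧
      -(W : Int) ≤ op.2.2.1 ∧ op.2.2.1 < (W : Int) ∧
      -(W : Int) ≤ op.2.2.2.2 + 1 ∧ op.2.2.2.2 + 1 < (W : Int)) :
    ∀ g : List (List Int), Unif g N W →
    Unif (ops.foldl (fun g op =>
      match op with
      | (v, r1, c1, r2, c2) =>
        pvBump (pvBump (pvBump (pvBump g r1 c1 v) r1 (c2 + 1) (-v)) (r2 + 1) c1 (-v)) (r2 + 1) (c2 + 1) v) g) N W ∧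
    ∀ k l : Nat, gget (ops.foldl (fun g op =>
      match op with
      | (v, r1, c1, r2, c2) =>
        pvBump (pvBump (pvBump (pvBump g r1 c1 v) r1 (c2 + 1) (-v)) (r2 + 1) c1 (-v)) (r2 + 1) (c2 + 1) v) g) k l
      = gget g k l + deltaSum N W ops k l := by
  induction ops with
  | nil => intro g hg; exact ⟨hg, fun k l => by simp [deltaSum]⟩
  | cons op ops ih =>
    intro g hg
    obtain ⟨v, r1, c1, r2, c2⟩ := op
    have hop := hops (v, r1, c1, r2, c2) List.mem_cons_self
    simp only at hop
    obtain ⟨h1, h2, h3, h4, h5, h6, h7, h8⟩ := hop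
    obtain ⟨hu1, hb1⟩ := gget_pvBump_mod N W g hg r1 c1 v ⟨h1, h2⟩ ⟨h5, h6⟩
    obtain ⟨hu2, hb2⟩ := gget_pvBump_mod N W _ hu1 r1 (c2 + 1) (-v) ⟨h1, h2⟩ ⟨h7, h8⟩
    obtain ⟨hu3, hb3⟩ := gget_pvBump_mod N W _ hu2 (r2 + 1) c1 (-v) ⟨h3, h4⟩ ⟨h5, h6⟩
    obtain ⟨hu4, hb4⟩ := gget_pvBump_mod N W _ hu3 (r2 + 1) (c2 + 1) v ⟨h3, h4⟩ ⟨h7, h8⟩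
    simp only [List.foldl_cons]
    obtain ⟨hsU, hsC⟩ := ih (fun o ho => hops o (List.mem_cons_of_mem _ ho)) _ hu4
    refine ⟨hsU, fun k l => ?_⟩
    rw [hsC k l, hb4 k l, hb3 k l, hb2 k l, hb1 k l]
    have hds : deltaSum N W ((v, r1, c1, r2, c2) :: ops) k l
        = delta N W (v, r1, c1, r2, c2) k l + deltaSum N W ops k l := by simp [deltaSum]
    rw [hds]
    simp only [delta]
    ring

-- Step 3, inner loop: prefix-sum row i over columns 1..d
theorem A_rowInner (N W : Nat) (i : Int) (hi : 0 ≤ i) (hiN : i < (N : Int)) (d : Nat) (hd : d + 2 ≤ W) :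
    ∀ g : List (List Int), Unif g N W →
    Unif ((PySem.List.pyRange 1 (1 + (d : Int)) 1).foldl
      (fun g j => pvBump g i j (PySem.List.pyGetD (PySem.List.pyGetD g i []) (j - 1) 0)) g) N W ∧
    ∀ k l : Nat, gget ((PySem.List.pyRange 1 (1 + (d : Int)) 1).foldl
      (fun g j => pvBump g i j (PySem.List.pyGetD (PySem.List.pyGetD g i []) (j - 1) 0)) g) k l
      = if k = i.toNat ∧ 1 ≤ l ∧ l ≤ d then pref (fun x => gget g k x) l else gget g k l := by
  induction d with
  | zero =>
    intro g hg
    rw [PySem.List.pyRange_one_eq_nil (by omega)]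
    exact ⟨hg, fun k l => by simp only [List.foldl_nil]; rw [if_neg (by omega)]⟩
  | succ d ih =>
    intro g hg
    have hsplit : PySem.List.pyRange 1 (1 + ((d + 1 : Nat) : Int)) 1
        = PySem.List.pyRange 1 (1 + (d : Int)) 1 ++ [1 + (d : Int)] := by
      push_cast
      rw [show (1 : Int) + ((d : Int) + 1) = (1 + (d : Int)) + 1 by ring]
      exact PySem.List.pyRange_one_succ_right (by omega)
    rw [hsplit, List.foldl_append]
    obtain ⟨hu1, hc1⟩ := ih (by omega) g hg
    set g1 := (PySem.List.pyRange 1 (1 + (d : Int)) 1).foldl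
      (fun g j => pvBump g i j (PySem.List.pyGetD (PySem.List.pyGetD g i []) (j - 1) 0)) g with hg1
    simp only [List.foldl_cons, List.foldl_nil]
    have hitn : ((i.toNat : Nat) : Int) = i := Int.toNat_of_nonneg hi
    have hdv : PySem.List.pyGetD (PySem.List.pyGetD g1 i []) (1 + (d : Int) - 1) 0
        = pref (fun x => gget g i.toNat x) d := by
      rw [show (1 : Int) + (d : Int) - 1 = ((d : Nat) : Int) by ring]
      rw [PySem.List.pyGetD_of_nonneg _ _ hi, PySem.List.pyGetD_natCast]
      have : (g1.getD i.toNat []).getD d 0 = gget g1 i.toNat d := rfl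
      rw [this, hc1 i.toNat d]
      rcases Nat.eq_zero_or_pos d with h0 | h0
      · subst h0
        rw [if_neg (by omega)]
        unfold pref gget
        simp
      · rw [if_pos ⟨rfl, h0, le_refl d⟩]
    rw [hdv]
    have hlen : (g1.length : Int) = (N : Int) := by exact_mod_cast congrArg (Nat.cast (R := Int)) hu1.1
    have hrow : ((g1.getD i.toNat []).length : Int) = (W : Int) := by
      exact_mod_cast congrArg (Nat.cast (R := Int)) (hu1.2 i.toNat (by omega))
    refine ⟨Unif_pvBump hu1 i (1 + (d : Int)) _ hi (by omega), fun k l => ?_⟩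
    rw [gget_pvBump g1 i (1 + (d : Int)) _ hi (by omega) (by omega) (by rw [hrow]; omega)]
    rw [hc1 k l]
    by_cases hk : k = i.toNat
    · subst hk
      have hps : pref (fun x => gget g i.toNat x) (d + 1)
          = pref (fun x => gget g i.toNat x) d + gget g i.toNat (d + 1) := pref_succ ..
      by_cases hl : l = d + 1
      · subst hl
        rw [if_neg (by omega), if_pos (show ((i.toNat : Nat) : Int) = i ∧ ((d + 1 : Nat) : Int) = 1 + (d : Int) by omega),
          if_pos (show i.toNat = i.toNat ∧ 1 ≤ d + 1 ∧ d + 1 ≤ d + 1 by omega)]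
        omega
      · by_cases h1l : 1 ≤ l ∧ l ≤ d
        · rw [if_pos ⟨rfl, h1l.1, h1l.2⟩, if_neg (by omega), if_pos ⟨rfl, h1l.1, by omega⟩]; omega
        · rw [if_neg (by omega), if_neg (by omega), if_neg (by omega)]; omega
    · rw [if_neg (by omega), if_neg (by omega), if_neg (by omega)]
      omega

-- Step 3, outer loop: rows 0..e-1 get row-prefix sums in columns 1..m
theorem A_rowOuter (n m : Nat) (e : Nat) (he : e ≤ n + 1) :
    ∀ g : List (List Int), Unif g (n + 2) (m + 2) →
    Unif ((PySem.List.pyRange 0 (e : Int) 1).foldl (fun g i =>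
      (PySem.List.pyRange 1 ((m : Int) + 1) 1).foldl
        (fun g j => pvBump g i j (PySem.List.pyGetD (PySem.List.pyGetD g i []) (j - 1) 0)) g) g) (n + 2) (m + 2) ∧
    ∀ k l : Nat, gget ((PySem.List.pyRange 0 (e : Int) 1).foldl (fun g i =>
      (PySem.List.pyRange 1 ((m : Int) + 1) 1).foldl
        (fun g j => pvBump g i j (PySem.List.pyGetD (PySem.List.pyGetD g i []) (j - 1) 0)) g) g) k l
      = if k < e ∧ 1 ≤ l ∧ l ≤ m then pref (fun x => gget g k x) l else gget g k l := by
  induction e with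
  | zero =>
    intro g hg
    rw [PySem.List.pyRange_one_eq_nil (a := 0) (b := ((0 : Nat) : Int)) (by omega)]
    exact ⟨hg, fun k l => by simp only [List.foldl_nil]; rw [if_neg (by omega)]⟩
  | succ e ih =>
    intro g hg
    have hsplit : PySem.List.pyRange 0 ((e + 1 : Nat) : Int) 1
        = PySem.List.pyRange 0 (e : Int) 1 ++ [(e : Int)] := by
      push_cast
      exact PySem.List.pyRange_one_succ_right (by omega)
    rw [hsplit, List.foldl_append]
    obtain ⟨hu1, hc1⟩ := ih (by omega) g hg
    set g1 := (PySem.List.pyRange 0 (e : Int) 1).foldl (fun g i =>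
      (PySem.List.pyRange 1 ((m : Int) + 1) 1).foldl
        (fun g j => pvBump g i j (PySem.List.pyGetD (PySem.List.pyGetD g i []) (j - 1) 0)) g) g with hg1
    simp only [List.foldl_cons, List.foldl_nil]
    rw [show ((m : Int) + 1) = 1 + (m : Int) by ring]
    obtain ⟨hu2, hc2⟩ := A_rowInner (n + 2) (m + 2) (e : Int) (by omega) (by omega) m (by omega) g1 hu1
    simp only [Int.toNat_natCast] at hc2
    refine ⟨hu2, fun k l => ?_⟩
    rw [hc2 k l]
    by_cases hk : k = e
    · subst hk
      by_cases hl : 1 ≤ l ∧ l ≤ m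
      · rw [if_pos ⟨rfl, hl.1, hl.2⟩, if_pos ⟨by omega, hl.1, hl.2⟩]
        refine pref_congr (fun x _ => ?_)
        rw [hc1 k x, if_neg (by omega)]
      · rw [if_neg (by omega), if_neg (by omega), hc1 k l, if_neg (by omega)]
    · rw [if_neg (by omega), hc1 k l]
      by_cases hke : k < e ∧ 1 ≤ l ∧ l ≤ m
      · rw [if_pos hke, if_pos ⟨by omega, hke.2⟩]
      · rw [if_neg hke, if_neg (by omega)]

-- Step 4, inner loop: prefix-sum column j over rows 1..d
theorem A_colInner (N W : Nat) (j : Int) (hj : 0 ≤ j) (hjW : j < (W : Int)) (d : Nat) (hd : d + 2 ≤ N) :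
    ∀ g : List (List Int), Unif g N W →
    Unif ((PySem.List.pyRange 1 (1 + (d : Int)) 1).foldl
      (fun g i => pvBump g i j (PySem.List.pyGetD (PySem.List.pyGetD g (i - 1) []) j 0)) g) N W ∧
    ∀ k l : Nat, gget ((PySem.List.pyRange 1 (1 + (d : Int)) 1).foldl
      (fun g i => pvBump g i j (PySem.List.pyGetD (PySem.List.pyGetD g (i - 1) []) j 0)) g) k l
      = if l = j.toNat ∧ 1 ≤ k ∧ k ≤ d then pref (fun x => gget g x l) k else gget g k l := by
  induction d with
  | zero =>
    intro g hg
    rw [PySem.List.pyRange_one_eq_nil (by omega)]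
    exact ⟨hg, fun k l => by simp only [List.foldl_nil]; rw [if_neg (by omega)]⟩
  | succ d ih =>
    intro g hg
    have hsplit : PySem.List.pyRange 1 (1 + ((d + 1 : Nat) : Int)) 1
        = PySem.List.pyRange 1 (1 + (d : Int)) 1 ++ [1 + (d : Int)] := by
      push_cast
      rw [show (1 : Int) + ((d : Int) + 1) = (1 + (d : Int)) + 1 by ring]
      exact PySem.List.pyRange_one_succ_right (by omega)
    rw [hsplit, List.foldl_append]
    obtain ⟨hu1, hc1⟩ := ih (by omega) g hg
    set g1 := (PySem.List.pyRange 1 (1 + (d : Int)) 1).foldl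
      (fun g i => pvBump g i j (PySem.List.pyGetD (PySem.List.pyGetD g (i - 1) []) j 0)) g with hg1
    simp only [List.foldl_cons, List.foldl_nil]
    have hjtn : ((j.toNat : Nat) : Int) = j := Int.toNat_of_nonneg hj
    have hdv : PySem.List.pyGetD (PySem.List.pyGetD g1 (1 + (d : Int) - 1) []) j 0
        = pref (fun x => gget g x j.toNat) d := by
      rw [show (1 : Int) + (d : Int) - 1 = ((d : Nat) : Int) by ring]
      rw [PySem.List.pyGetD_natCast, PySem.List.pyGetD_of_nonneg _ _ hj]
      have : (g1.getD d []).getD j.toNat 0 = gget g1 d j.toNat := rfl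
      rw [this, hc1 d j.toNat]
      rcases Nat.eq_zero_or_pos d with h0 | h0
      · subst h0
        rw [if_neg (by omega)]
        unfold pref
        simp
      · rw [if_pos ⟨rfl, h0, le_refl d⟩]
    rw [hdv]
    have hlen : (g1.length : Int) = (N : Int) := by exact_mod_cast congrArg (Nat.cast (R := Int)) hu1.1
    have hrow : ((g1.getD (1 + (d : Int)).toNat []).length : Int) = (W : Int) := by
      exact_mod_cast congrArg (Nat.cast (R := Int)) (hu1.2 (1 + (d : Int)).toNat (by omega))
    refine ⟨Unif_pvBump hu1 (1 + (d : Int)) j _ (by omega) hj, fun k l => ?_⟩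
    rw [gget_pvBump g1 (1 + (d : Int)) j _ (by omega) hj (by omega) (by rw [hrow]; omega)]
    rw [hc1 k l]
    by_cases hl : l = j.toNat
    · subst hl
      have hps : pref (fun x => gget g x j.toNat) (d + 1)
          = pref (fun x => gget g x j.toNat) d + gget g (d + 1) j.toNat := pref_succ ..
      by_cases hk : k = d + 1
      · subst hk
        rw [if_neg (by omega), if_pos (show ((d + 1 : Nat) : Int) = 1 + (d : Int) ∧ ((j.toNat : Nat) : Int) = j by omega),
          if_pos (show j.toNat = j.toNat ∧ 1 ≤ d + 1 ∧ d + 1 ≤ d + 1 by omega)]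
        omega
      · by_cases h1k : 1 ≤ k ∧ k ≤ d
        · rw [if_pos ⟨rfl, h1k.1, h1k.2⟩, if_neg (by omega), if_pos ⟨rfl, h1k.1, by omega⟩]; omega
        · rw [if_neg (by omega), if_neg (by omega), if_neg (by omega)]; omega
    · rw [if_neg (by omega), if_neg (by omega), if_neg (by omega)]
      omega

-- Step 4, outer loop: columns 0..e-1 get column-prefix sums in rows 1..n
theorem A_colOuter (n m : Nat) (e : Nat) (he : e ≤ m + 1) :
    ∀ g : List (List Int), Unif g (n + 2) (m + 2) →
    Unif ((PySem.List.pyRange 0 (e : Int) 1).foldl (fun g j =>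
      (PySem.List.pyRange 1 ((n : Int) + 1) 1).foldl
        (fun g i => pvBump g i j (PySem.List.pyGetD (PySem.List.pyGetD g (i - 1) []) j 0)) g) g) (n + 2) (m + 2) ∧
    ∀ k l : Nat, gget ((PySem.List.pyRange 0 (e : Int) 1).foldl (fun g j =>
      (PySem.List.pyRange 1 ((n : Int) + 1) 1).foldl
        (fun g i => pvBump g i j (PySem.List.pyGetD (PySem.List.pyGetD g (i - 1) []) j 0)) g) g) k l
      = if l < e ∧ 1 ≤ k ∧ k ≤ n then pref (fun x => gget g x l) k else gget g k l := by
  induction e with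
  | zero =>
    intro g hg
    rw [PySem.List.pyRange_one_eq_nil (a := 0) (b := ((0 : Nat) : Int)) (by omega)]
    exact ⟨hg, fun k l => by simp only [List.foldl_nil]; rw [if_neg (by omega)]⟩
  | succ e ih =>
    intro g hg
    have hsplit : PySem.List.pyRange 0 ((e + 1 : Nat) : Int) 1
        = PySem.List.pyRange 0 (e : Int) 1 ++ [(e : Int)] := by
      push_cast
      exact PySem.List.pyRange_one_succ_right (by omega)
    rw [hsplit, List.foldl_append]
    obtain ⟨hu1, hc1⟩ := ih (by omega) g hg
    set g1 := (PySem.List.pyRange 0 (e : Int) 1).foldl (fun g j =>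
      (PySem.List.pyRange 1 ((n : Int) + 1) 1).foldl
        (fun g i => pvBump g i j (PySem.List.pyGetD (PySem.List.pyGetD g (i - 1) []) j 0)) g) g with hg1
    simp only [List.foldl_cons, List.foldl_nil]
    rw [show ((n : Int) + 1) = 1 + (n : Int) by ring]
    obtain ⟨hu2, hc2⟩ := A_colInner (n + 2) (m + 2) (e : Int) (by omega) (by omega) n (by omega) g1 hu1
    simp only [Int.toNat_natCast] at hc2
    refine ⟨hu2, fun k l => ?_⟩
    rw [hc2 k l]
    by_cases hl : l = e
    · subst hl
      by_cases hk : 1 ≤ k ∧ k ≤ n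
      · rw [if_pos ⟨rfl, hk.1, hk.2⟩, if_pos ⟨by omega, hk.1, hk.2⟩]
        refine pref_congr (fun x _ => ?_)
        rw [hc1 x l, if_neg (by omega)]
      · rw [if_neg (by omega), if_neg (by omega), hc1 k l, if_neg (by omega)]
    · rw [if_neg (by omega), hc1 k l]
      by_cases hle : l < e ∧ 1 ≤ k ∧ k ≤ n
      · rw [if_pos hle, if_pos ⟨by omega, hle.2⟩]
      · rw [if_neg hle, if_neg (by omega)]

theorem pref_zero (f : Nat → Int) : pref f 0 = f 0 := by unfold pref; simp

-- Step 5, inner loop: add row i of D to row i of g in columns 0..d-1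
theorem A_finInner (i : Int) (hi : 0 ≤ i) (D : List (List Int)) (d : Nat) :
    ∀ g : List (List Int), i < (g.length : Int) → (d : Int) ≤ ((g.getD i.toNat []).length : Int) →
    sameShape ((PySem.List.pyRange 0 (d : Int) 1).foldl
      (fun acc j => pvBump acc i j (PySem.List.pyGetD (PySem.List.pyGetD D i []) j 0)) g) g ∧
    ∀ k l : Nat, gget ((PySem.List.pyRange 0 (d : Int) 1).foldl
      (fun acc j => pvBump acc i j (PySem.List.pyGetD (PySem.List.pyGetD D i []) j 0)) g) k l
      = gget g k l + (if k = i.toNat ∧ l < d then gget D i.toNat l else 0) := by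
  induction d with
  | zero =>
    intro g _ _
    rw [PySem.List.pyRange_one_eq_nil (a := 0) (b := ((0 : Nat) : Int)) (by omega)]
    exact ⟨sameShape_refl g, fun k l => by simp only [List.foldl_nil]; rw [if_neg (by omega), add_zero]⟩
  | succ d ih =>
    intro g hgl hgr
    have hsplit : PySem.List.pyRange 0 ((d + 1 : Nat) : Int) 1
        = PySem.List.pyRange 0 (d : Int) 1 ++ [(d : Int)] := by
      push_cast
      exact PySem.List.pyRange_one_succ_right (by omega)
    rw [hsplit, List.foldl_append]
    obtain ⟨hs1, hc1⟩ := ih g hgl (by push_cast at hgr ⊢; omega)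
    set g1 := (PySem.List.pyRange 0 (d : Int) 1).foldl
      (fun acc j => pvBump acc i j (PySem.List.pyGetD (PySem.List.pyGetD D i []) j 0)) g with hg1
    simp only [List.foldl_cons, List.foldl_nil]
    have hdv : PySem.List.pyGetD (PySem.List.pyGetD D i []) ((d : Nat) : Int) 0 = gget D i.toNat d := by
      rw [PySem.List.pyGetD_of_nonneg _ _ hi, PySem.List.pyGetD_natCast]
      rfl
    have hlen : (g1.length : Int) = (g.length : Int) := by exact_mod_cast hs1.1
    have hrow : ((g1.getD i.toNat []).length : Int) = ((g.getD i.toNat []).length : Int) := by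
      exact_mod_cast hs1.2 i.toNat
    refine ⟨sameShape_trans (sameShape_pvBump g1 i (d : Int) _ hi (by omega)) hs1, fun k l => ?_⟩
    rw [gget_pvBump g1 i (d : Int) _ hi (by omega) (by omega) (by rw [hrow]; push_cast at hgr; omega)]
    rw [hc1 k l, hdv]
    have hitn : ((i.toNat : Nat) : Int) = i := Int.toNat_of_nonneg hi
    by_cases hk : k = i.toNat
    · subst hk
      by_cases hl : l = d
      · subst hl
        rw [if_neg (by omega), if_pos (show ((i.toNat : Nat) : Int) = i ∧ ((l : Nat) : Int) = (l : Int) by omega),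
          if_pos (show i.toNat = i.toNat ∧ l < l + 1 by omega)]
        omega
      · by_cases hld : l < d
        · rw [if_pos ⟨rfl, hld⟩, if_neg (by omega), if_pos ⟨rfl, by omega⟩]; omega
        · rw [if_neg (by omega), if_neg (by omega), if_neg (by omega)]; omega
    · rw [if_neg (by omega), if_neg (by omega), if_neg (by omega)]
      omega

-- Step 5, outer loop: rows 0..e-1 get D added in columns 0..m-1
theorem A_finOuter (m : Nat) (D : List (List Int)) (e : Nat) :
    ∀ g : List (List Int), (e : Int) ≤ (g.length : Int) →
    (∀ k : Nat, k < g.length → (m : Int) ≤ ((g.getD k []).length : Int)) →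
    sameShape ((PySem.List.pyRange 0 (e : Int) 1).foldl (fun acc i =>
      (PySem.List.pyRange 0 (m : Int) 1).foldl
        (fun acc j => pvBump acc i j (PySem.List.pyGetD (PySem.List.pyGetD D i []) j 0)) acc) g) g ∧
    ∀ k l : Nat, gget ((PySem.List.pyRange 0 (e : Int) 1).foldl (fun acc i =>
      (PySem.List.pyRange 0 (m : Int) 1).foldl
        (fun acc j => pvBump acc i j (PySem.List.pyGetD (PySem.List.pyGetD D i []) j 0)) acc) g) k l
      = gget g k l + (if k < e ∧ l < m then gget D k l else 0) := by
  induction e with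
  | zero =>
    intro g _ _
    rw [PySem.List.pyRange_one_eq_nil (a := 0) (b := ((0 : Nat) : Int)) (by omega)]
    exact ⟨sameShape_refl g, fun k l => by simp only [List.foldl_nil]; rw [if_neg (by omega), add_zero]⟩
  | succ e ih =>
    intro g hgl hgr
    have hsplit : PySem.List.pyRange 0 ((e + 1 : Nat) : Int) 1
        = PySem.List.pyRange 0 (e : Int) 1 ++ [(e : Int)] := by
      push_cast
      exact PySem.List.pyRange_one_succ_right (by omega)
    rw [hsplit, List.foldl_append]
    obtain ⟨hs1, hc1⟩ := ih g (by push_cast at hgl ⊢; omega) hgr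
    set g1 := (PySem.List.pyRange 0 (e : Int) 1).foldl (fun acc i =>
      (PySem.List.pyRange 0 (m : Int) 1).foldl
        (fun acc j => pvBump acc i j (PySem.List.pyGetD (PySem.List.pyGetD D i []) j 0)) acc) g with hg1
    simp only [List.foldl_cons, List.foldl_nil]
    have hlen : (g1.length : Int) = (g.length : Int) := by exact_mod_cast hs1.1
    have hrowe : ((g1.getD e []).length : Int) = ((g.getD e []).length : Int) := by
      exact_mod_cast hs1.2 e
    obtain ⟨hs2, hc2⟩ := A_finInner (e : Int) (by omega) D m g1
      (by rw [hlen]; push_cast at hgl ⊢; omega)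
      (by simp only [Int.toNat_natCast]; rw [hrowe]; exact hgr e (by push_cast at hgl; omega))
    simp only [Int.toNat_natCast] at hc2
    refine ⟨sameShape_trans hs2 hs1, fun k l => ?_⟩
    rw [hc2 k l, hc1 k l]
    by_cases hk : k = e
    · subst hk
      by_cases hl : l < m
      · rw [if_neg (by omega), if_pos ⟨rfl, hl⟩, if_pos ⟨by omega, hl⟩]; omega
      · rw [if_neg (by omega), if_neg (by omega), if_neg (by omega)]; omega
    · by_cases hke : k < e ∧ l < m
      · rw [if_pos hke, if_neg (by omega), if_pos ⟨by omega, hke.2⟩]; omega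
      · rw [if_neg hke, if_neg (by omega), if_neg (by omega)]; omega

-- oprSum vanishes outside the matrix
theorem oprSum_outside (n m : Nat) (opr : List (Int × Int × Int × Int × Int)) (k l : Nat)
    (h : n ≤ k ∨ m ≤ l) : oprSum n m opr k l = 0 := by
  induction opr with
  | nil => simp [oprSum]
  | cons op ops ih =>
    have : oprSum n m (op :: ops) k l = qcontrib n m op k l + oprSum n m ops k l := by simp [oprSum]
    rw [this, ih]
    unfold qcontrib
    rw [if_neg (by omega), if_neg (by omega), if_neg (by omega), if_neg (by omega)]
    omega

-- inside the matrix the unclipped quadrant value is the clipped one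
theorem dsumSum_eq_oprSum (n m : Nat) (opr : List (Int × Int × Int × Int × Int)) (k l : Nat)
    (hk : k < n) (hl : l < m) :
    (opr.map (fun op => dsum (n + 2) (m + 2) op k l)).sum = oprSum n m opr k l := by
  induction opr with
  | nil => simp [oprSum]
  | cons op ops ih =>
    have h1 : ((op :: ops).map (fun op => dsum (n + 2) (m + 2) op k l)).sum
        = dsum (n + 2) (m + 2) op k l + (ops.map (fun op => dsum (n + 2) (m + 2) op k l)).sum := by simp
    have h2 : oprSum n m (op :: ops) k l = qcontrib n m op k l + oprSum n m ops k l := by simp [oprSum]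
    rw [h1, h2, ih]
    have hq : dsum (n + 2) (m + 2) op k l = qcontrib n m op k l := by
      unfold dsum qcontrib
      congr 1
      congr 1
      congr 1
      all_goals split_ifs <;> omega
    rw [hq]

-- the double prefix sum of deltaSum is the sum of dsums
theorem prefpref (N W : Nat) (hN : 0 < N) (hW : 0 < W) (opr : List (Int × Int × Int × Int × Int)) (k l : Nat) :
    pref (fun x => pref (fun y => deltaSum N W opr x y) l) k
      = (opr.map (fun op => dsum N W op k l)).sum := by
  induction opr with
  | nil =>
    have h1 : ∀ x : Nat, pref (fun y => deltaSum N W ([] : List (Int × Int × Int × Int × Int)) x y) l = 0 := by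
      intro x
      rw [show pref (fun y => deltaSum N W ([] : List (Int × Int × Int × Int × Int)) x y) l
          = pref (fun _ => (0 : Int)) l from pref_congr (fun y _ => by simp [deltaSum])]
      exact pref_zero_fn l
    rw [show pref (fun x => pref (fun y => deltaSum N W ([] : List (Int × Int × Int × Int × Int)) x y) l) k
        = pref (fun _ => (0 : Int)) k from pref_congr (fun x _ => h1 x), pref_zero_fn]
    simp
  | cons op ops ih =>
    have hsplit : ∀ x : Nat, pref (fun y => deltaSum N W (op :: ops) x y) l
        = pref (fun y => delta N W op x y) l + pref (fun y => deltaSum N W ops x y) l := by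
      intro x
      rw [show pref (fun y => deltaSum N W (op :: ops) x y) l
          = pref (fun y => delta N W op x y + deltaSum N W ops x y) l from
          pref_congr (fun y _ => by simp [deltaSum])]
      exact pref_add ..
    rw [show pref (fun x => pref (fun y => deltaSum N W (op :: ops) x y) l) k
        = pref (fun x => pref (fun y => delta N W op x y) l + pref (fun y => deltaSum N W ops x y) l) k from
        pref_congr (fun x _ => hsplit x), pref_add]
    rw [ih]
    have hdp : pref (fun x => pref (fun y => delta N W op x y) l) k = dsum N W op k l :=
      delta_prefix N W hN hW op k l
    rw [hdp]
    simp

theorem A_spec (mat : List (List Int)) (opr : List (Int × Int × Int × Int × Int))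
    (_hne : mat ≠ [])
    (hrows : ∀ row ∈ mat, (PySem.List.pyGetD mat 0 []).length ≤ row.length)
    (hops : ∀ op ∈ opr,
      -((mat.length : Int) + 2) ≤ op.2.1 ∧ op.2.1 < (mat.length : Int) + 2 ∧
      -((mat.length : Int) + 2) ≤ op.2.2.2.1 + 1 ∧ op.2.2.2.1 + 1 < (mat.length : Int) + 2 ∧
      -(((PySem.List.pyGetD mat 0 []).length : Int) + 2) ≤ op.2.2.1 ∧
      op.2.2.1 < ((PySem.List.pyGetD mat 0 []).length : Int) + 2 ∧
      -(((PySem.List.pyGetD mat 0 []).length : Int) + 2) ≤ op.2.2.2.2 + 1 ∧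
      op.2.2.2.2 + 1 < ((PySem.List.pyGetD mat 0 []).length : Int) + 2) :
    sameShape (applyDiff2D mat opr) mat ∧
    ∀ k l : Nat, gget (applyDiff2D mat opr) k l
      = gget mat k l + oprSum mat.length (PySem.List.pyGetD mat 0 []).length opr k l := by
  have hA : applyDiff2D mat opr = ((PySem.List.pyRange 0 ((mat.length : Nat) : Int) 1).foldl (fun acc i =>
      (PySem.List.pyRange 0 (((PySem.List.pyGetD mat 0 []).length : Nat) : Int) 1).foldl
        (fun acc j => pvBump acc i j (PySem.List.pyGetD (PySem.List.pyGetD ((PySem.List.pyRange 0 (((PySem.List.pyGetD mat 0 []).length + 1 : Nat) : Int) 1).foldl (fun g j =>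
      (PySem.List.pyRange 1 ((mat.length : Int) + 1) 1).foldl
        (fun g i => pvBump g i j (PySem.List.pyGetD (PySem.List.pyGetD g (i - 1) []) j 0)) g)
      ((PySem.List.pyRange 0 ((mat.length + 1 : Nat) : Int) 1).foldl (fun g i =>
      (PySem.List.pyRange 1 (((PySem.List.pyGetD mat 0 []).length : Int) + 1) 1).foldl
        (fun g j => pvBump g i j (PySem.List.pyGetD (PySem.List.pyGetD g i []) (j - 1) 0)) g)
      (opr.foldl (fun g op =>
      match op with
      | (v, r1, c1, r2, c2) =>
        pvBump (pvBump (pvBump (pvBump g r1 c1 v) r1 (c2 + 1) (-v)) (r2 + 1) c1 (-v)) (r2 + 1) (c2 + 1) v)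
      (List.replicate (mat.length + 2) (List.replicate ((PySem.List.pyGetD mat 0 []).length + 2) (0 : Int)))))) i []) j 0)) acc)
      mat) := rfl
  rw [hA]
  have hops2 : ∀ op ∈ opr,
      -(((mat.length + 2 : Nat) : Int)) ≤ op.2.1 ∧ op.2.1 < ((mat.length + 2 : Nat) : Int) ∧
      -(((mat.length + 2 : Nat) : Int)) ≤ op.2.2.2.1 + 1 ∧ op.2.2.2.1 + 1 < ((mat.length + 2 : Nat) : Int) ∧
      -((((PySem.List.pyGetD mat 0 []).length + 2 : Nat) : Int)) ≤ op.2.2.1 ∧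
      op.2.2.1 < (((PySem.List.pyGetD mat 0 []).length + 2 : Nat) : Int) ∧
      -((((PySem.List.pyGetD mat 0 []).length + 2 : Nat) : Int)) ≤ op.2.2.2.2 + 1 ∧
      op.2.2.2.2 + 1 < (((PySem.List.pyGetD mat 0 []).length + 2 : Nat) : Int) := by
    intro op hop
    obtain ⟨a1, a2, a3, a4, a5, a6, a7, a8⟩ := hops op hop
    refine ⟨?_, ?_, ?_, ?_, ?_, ?_, ?_, ?_⟩ <;> push_cast <;> omega
  obtain ⟨hU1, hC1⟩ := A_opsLoop (mat.length + 2) ((PySem.List.pyGetD mat 0 []).length + 2) opr hops2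
    (List.replicate (mat.length + 2) (List.replicate ((PySem.List.pyGetD mat 0 []).length + 2) (0 : Int))) (Unif_replicate _ _)
  obtain ⟨hU2, hC2⟩ := A_rowOuter mat.length (PySem.List.pyGetD mat 0 []).length (mat.length + 1)
    (le_refl _) (opr.foldl (fun g op =>
      match op with
      | (v, r1, c1, r2, c2) =>
        pvBump (pvBump (pvBump (pvBump g r1 c1 v) r1 (c2 + 1) (-v)) (r2 + 1) c1 (-v)) (r2 + 1) (c2 + 1) v)
      (List.replicate (mat.length + 2) (List.replicate ((PySem.List.pyGetD mat 0 []).length + 2) (0 : Int)))) hU1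
  obtain ⟨hU3, hC3⟩ := A_colOuter mat.length (PySem.List.pyGetD mat 0 []).length
    ((PySem.List.pyGetD mat 0 []).length + 1) (le_refl _) ((PySem.List.pyRange 0 ((mat.length + 1 : Nat) : Int) 1).foldl (fun g i =>
      (PySem.List.pyRange 1 (((PySem.List.pyGetD mat 0 []).length : Int) + 1) 1).foldl
        (fun g j => pvBump g i j (PySem.List.pyGetD (PySem.List.pyGetD g i []) (j - 1) 0)) g)
      (opr.foldl (fun g op =>
      match op with
      | (v, r1, c1, r2, c2) =>
        pvBump (pvBump (pvBump (pvBump g r1 c1 v) r1 (c2 + 1) (-v)) (r2 + 1) c1 (-v)) (r2 + 1) (c2 + 1) v)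
      (List.replicate (mat.length + 2) (List.replicate ((PySem.List.pyGetD mat 0 []).length + 2) (0 : Int))))) hU2
  have hrowsK : ∀ k : Nat, k < mat.length →
      (((PySem.List.pyGetD mat 0 []).length : Nat) : Int) ≤ ((mat.getD k []).length : Int) := by
    intro k hk
    have hmem : mat.getD k [] ∈ mat := by
      rw [List.getD_eq_getElem mat [] hk]; exact List.getElem_mem hk
    have := hrows _ hmem
    omega
  obtain ⟨hS4, hC4⟩ := A_finOuter (PySem.List.pyGetD mat 0 []).length ((PySem.List.pyRange 0 (((PySem.List.pyGetD mat 0 []).length + 1 : Nat) : Int) 1).foldl (fun g j =>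
      (PySem.List.pyRange 1 ((mat.length : Int) + 1) 1).foldl
        (fun g i => pvBump g i j (PySem.List.pyGetD (PySem.List.pyGetD g (i - 1) []) j 0)) g)
      ((PySem.List.pyRange 0 ((mat.length + 1 : Nat) : Int) 1).foldl (fun g i =>
      (PySem.List.pyRange 1 (((PySem.List.pyGetD mat 0 []).length : Int) + 1) 1).foldl
        (fun g j => pvBump g i j (PySem.List.pyGetD (PySem.List.pyGetD g i []) (j - 1) 0)) g)
      (opr.foldl (fun g op =>
      match op with
      | (v, r1, c1, r2, c2) =>
        pvBump (pvBump (pvBump (pvBump g r1 c1 v) r1 (c2 + 1) (-v)) (r2 + 1) c1 (-v)) (r2 + 1) (c2 + 1) v)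
      (List.replicate (mat.length + 2) (List.replicate ((PySem.List.pyGetD mat 0 []).length + 2) (0 : Int)))))) mat.length mat
    (by omega) hrowsK
  refine ⟨hS4, fun k l => ?_⟩
  rw [hC4 k l]
  have e1 : ∀ x y : Nat, gget (opr.foldl (fun g op =>
      match op with
      | (v, r1, c1, r2, c2) =>
        pvBump (pvBump (pvBump (pvBump g r1 c1 v) r1 (c2 + 1) (-v)) (r2 + 1) c1 (-v)) (r2 + 1) (c2 + 1) v)
      (List.replicate (mat.length + 2) (List.replicate ((PySem.List.pyGetD mat 0 []).length + 2) (0 : Int)))) x y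
      = deltaSum (mat.length + 2) ((PySem.List.pyGetD mat 0 []).length + 2) opr x y := by
    intro x y
    rw [hC1 x y, gget_replicate, zero_add]
  have e2 : ∀ x : Nat, x < mat.length → l < (PySem.List.pyGetD mat 0 []).length →
      gget ((PySem.List.pyRange 0 ((mat.length + 1 : Nat) : Int) 1).foldl (fun g i =>
      (PySem.List.pyRange 1 (((PySem.List.pyGetD mat 0 []).length : Int) + 1) 1).foldl
        (fun g j => pvBump g i j (PySem.List.pyGetD (PySem.List.pyGetD g i []) (j - 1) 0)) g)
      (opr.foldl (fun g op =>
      match op with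
      | (v, r1, c1, r2, c2) =>
        pvBump (pvBump (pvBump (pvBump g r1 c1 v) r1 (c2 + 1) (-v)) (r2 + 1) c1 (-v)) (r2 + 1) (c2 + 1) v)
      (List.replicate (mat.length + 2) (List.replicate ((PySem.List.pyGetD mat 0 []).length + 2) (0 : Int))))) x l = pref (fun y => gget (opr.foldl (fun g op =>
      match op with
      | (v, r1, c1, r2, c2) =>
        pvBump (pvBump (pvBump (pvBump g r1 c1 v) r1 (c2 + 1) (-v)) (r2 + 1) c1 (-v)) (r2 + 1) (c2 + 1) v)
      (List.replicate (mat.length + 2) (List.replicate ((PySem.List.pyGetD mat 0 []).length + 2) (0 : Int)))) x y) l := by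
    intro x hx hl
    rcases Nat.eq_zero_or_pos l with h0 | h0
    · subst h0
      rw [hC2 x 0, if_neg (by omega), pref_zero]
    · rw [hC2 x l, if_pos ⟨by omega, h0, by omega⟩]
  by_cases hin : k < mat.length ∧ l < (PySem.List.pyGetD mat 0 []).length
  · rw [if_pos hin]
    have e3 : gget ((PySem.List.pyRange 0 (((PySem.List.pyGetD mat 0 []).length + 1 : Nat) : Int) 1).foldl (fun g j =>
      (PySem.List.pyRange 1 ((mat.length : Int) + 1) 1).foldl
        (fun g i => pvBump g i j (PySem.List.pyGetD (PySem.List.pyGetD g (i - 1) []) j 0)) g)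
      ((PySem.List.pyRange 0 ((mat.length + 1 : Nat) : Int) 1).foldl (fun g i =>
      (PySem.List.pyRange 1 (((PySem.List.pyGetD mat 0 []).length : Int) + 1) 1).foldl
        (fun g j => pvBump g i j (PySem.List.pyGetD (PySem.List.pyGetD g i []) (j - 1) 0)) g)
      (opr.foldl (fun g op =>
      match op with
      | (v, r1, c1, r2, c2) =>
        pvBump (pvBump (pvBump (pvBump g r1 c1 v) r1 (c2 + 1) (-v)) (r2 + 1) c1 (-v)) (r2 + 1) (c2 + 1) v)
      (List.replicate (mat.length + 2) (List.replicate ((PySem.List.pyGetD mat 0 []).length + 2) (0 : Int)))))) k l = pref (fun x => gget ((PySem.List.pyRange 0 ((mat.length + 1 : Nat) : Int) 1).foldl (fun g i =>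
      (PySem.List.pyRange 1 (((PySem.List.pyGetD mat 0 []).length : Int) + 1) 1).foldl
        (fun g j => pvBump g i j (PySem.List.pyGetD (PySem.List.pyGetD g i []) (j - 1) 0)) g)
      (opr.foldl (fun g op =>
      match op with
      | (v, r1, c1, r2, c2) =>
        pvBump (pvBump (pvBump (pvBump g r1 c1 v) r1 (c2 + 1) (-v)) (r2 + 1) c1 (-v)) (r2 + 1) (c2 + 1) v)
      (List.replicate (mat.length + 2) (List.replicate ((PySem.List.pyGetD mat 0 []).length + 2) (0 : Int))))) x l) k := by
      rcases Nat.eq_zero_or_pos k with h0 | h0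
      · subst h0
        rw [hC3 0 l, if_neg (by omega), pref_zero]
      · rw [hC3 k l, if_pos ⟨by omega, h0, by omega⟩]
    rw [e3]
    rw [show pref (fun x => gget ((PySem.List.pyRange 0 ((mat.length + 1 : Nat) : Int) 1).foldl (fun g i =>
      (PySem.List.pyRange 1 (((PySem.List.pyGetD mat 0 []).length : Int) + 1) 1).foldl
        (fun g j => pvBump g i j (PySem.List.pyGetD (PySem.List.pyGetD g i []) (j - 1) 0)) g)
      (opr.foldl (fun g op =>
      match op with
      | (v, r1, c1, r2, c2) =>
        pvBump (pvBump (pvBump (pvBump g r1 c1 v) r1 (c2 + 1) (-v)) (r2 + 1) c1 (-v)) (r2 + 1) (c2 + 1) v)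
      (List.replicate (mat.length + 2) (List.replicate ((PySem.List.pyGetD mat 0 []).length + 2) (0 : Int))))) x l) k
        = pref (fun x => pref (fun y => deltaSum (mat.length + 2) ((PySem.List.pyGetD mat 0 []).length + 2) opr x y) l) k from
      pref_congr (fun x hx => by
        rw [e2 x (by omega) hin.2]
        exact pref_congr (fun y _ => e1 x y))]
    rw [prefpref (mat.length + 2) ((PySem.List.pyGetD mat 0 []).length + 2) (by omega) (by omega) opr k l]
    rw [dsumSum_eq_oprSum mat.length (PySem.List.pyGetD mat 0 []).length opr k l hin.1 hin.2]
  · rw [if_neg hin]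
    rw [oprSum_outside mat.length (PySem.List.pyGetD mat 0 []).length opr k l (by omega)]

-- two lists of lists with the same shape and the same cells are equal
theorem matExt (g h : List (List Int)) (hs : sameShape g h)
    (hc : ∀ k l : Nat, gget g k l = gget h k l) : g = h := by
  apply List.ext_getElem hs.1
  intro n h1 h2
  apply List.ext_getElem
  · have := hs.2 n
    rwa [List.getD_eq_getElem g [] h1, List.getD_eq_getElem h [] h2] at this
  · intro l hl1 hl2
    have := hc n l
    unfold gget at this
    rwa [List.getD_eq_getElem g [] h1, List.getD_eq_getElem h [] h2,
      List.getD_eq_getElem _ 0 hl1, List.getD_eq_getElem _ 0 hl2] at this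

-- ---- B side: the streaming pass computes the clipped 2D prefix sums ----

-- column sum of D over rows 0..i-1, and its row-wise running total
def csum (D : List (List Int)) (i c : Nat) : Int := ((List.range i).map (fun r => gget D r c)).sum

def tcol (D : List (List Int)) (k l : Nat) : Int :=
  ((List.range (l + 1)).map (fun c => csum D (k + 1) c)).sum

theorem csum_zero (D : List (List Int)) (c : Nat) : csum D 0 c = 0 := by unfold csum; simp

theorem csum_succ (D : List (List Int)) (i c : Nat) :
    csum D (i + 1) c = csum D i c + gget D i c := by
  unfold csum; rw [List.range_succ]; simp

theorem tcol_zero (D : List (List Int)) (k : Nat) : tcol D k 0 = csum D (k + 1) 0 := by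
  unfold tcol; simp

theorem tcol_succ (D : List (List Int)) (k l : Nat) :
    tcol D k (l + 1) = tcol D k l + csum D (k + 1) (l + 1) := by
  unfold tcol; rw [List.range_succ]; simp

theorem getD_replicate_zero (N c : Nat) : (List.replicate N (0 : Int)).getD c 0 = 0 := by
  rw [List.getD_eq_getElem?_getD, List.getElem?_replicate]
  split_ifs <;> rfl

-- inner streaming loop: row i, columns 0..d-1
theorem B_inner (D : List (List Int)) (i m : Nat) (g : List (List Int)) (ca : List Int)
    (hg : i < g.length) (hrow : m ≤ (g.getD i []).length) (hca1 : ca.length = m)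
    (hca2 : ∀ c : Nat, c < m → ca.getD c 0 = csum D i c) :
    ∀ d : Nat, d ≤ m →
    sameShape ((PySem.List.pyRange 0 (d : Int) 1).foldl (bStep D (i : Int)) ((g, ca), 0)).1.1 g ∧
    (∀ k l : Nat, gget ((PySem.List.pyRange 0 (d : Int) 1).foldl (bStep D (i : Int)) ((g, ca), 0)).1.1 k l
      = gget g k l + (if k = i ∧ l < d then tcol D i l else 0)) ∧
    ((PySem.List.pyRange 0 (d : Int) 1).foldl (bStep D (i : Int)) ((g, ca), 0)).1.2.length = m ∧
    (∀ c : Nat, c < m → ((PySem.List.pyRange 0 (d : Int) 1).foldl (bStep D (i : Int)) ((g, ca), 0)).1.2.getD c 0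
      = if c < d then csum D (i + 1) c else csum D i c) ∧
    ((PySem.List.pyRange 0 (d : Int) 1).foldl (bStep D (i : Int)) ((g, ca), 0)).2
      = (if d = 0 then 0 else tcol D i (d - 1)) := by
  intro d
  induction d with
  | zero =>
    intro _
    rw [PySem.List.pyRange_one_eq_nil (a := 0) (b := ((0 : Nat) : Int)) (by omega)]
    simp only [List.foldl_nil]
    refine ⟨sameShape_refl g, fun k l => by rw [if_neg (by omega), add_zero], hca1,
      fun c hc => by rw [if_neg (by omega)]; exact hca2 c hc, by simp⟩
  | succ d ih =>
    intro hd
    obtain ⟨s1, s2, s3, s4, s5⟩ := ih (by omega)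
    have hsplit : PySem.List.pyRange 0 ((d + 1 : Nat) : Int) 1
        = PySem.List.pyRange 0 (d : Int) 1 ++ [(d : Int)] := by
      push_cast
      exact PySem.List.pyRange_one_succ_right (by omega)
    rw [hsplit, List.foldl_append]
    set st := (PySem.List.pyRange 0 (d : Int) 1).foldl (bStep D (i : Int)) ((g, ca), 0) with hst
    simp only [List.foldl_cons, List.foldl_nil, bStep]
    have hcaD : PySem.List.pyGetD st.1.2 ((d : Nat) : Int) 0 = csum D i d := by
      rw [PySem.List.pyGetD_natCast, s4 d (by omega), if_neg (by omega)]
    have hDid : PySem.List.pyGetD (PySem.List.pyGetD D ((i : Nat) : Int) []) ((d : Nat) : Int) 0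
        = gget D i d := by
      rw [PySem.List.pyGetD_natCast, PySem.List.pyGetD_natCast]; rfl
    have hset : PySem.List.pySetD st.1.2 ((d : Nat) : Int) (csum D i d + gget D i d)
        = st.1.2.set d (csum D (i + 1) d) := by
      rw [PySem.List.pySetD_of_nonneg _ _ (by omega), csum_succ]
      simp
    rw [hcaD, hDid, hset]
    have hnew : (st.1.2.set d (csum D (i + 1) d)).getD d 0 = csum D (i + 1) d := by
      rw [getD_set, if_pos ⟨rfl, by omega⟩]
    have hrun : PySem.List.pyGetD (st.1.2.set d (csum D (i + 1) d)) ((d : Nat) : Int) 0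
        = csum D (i + 1) d := by
      rw [PySem.List.pyGetD_natCast, hnew]
    rw [hrun]
    have hrunval : st.2 + csum D (i + 1) d = tcol D i d := by
      rcases Nat.eq_zero_or_pos d with h0 | h0
      · subst h0; rw [s5, tcol_zero]; simp
      · obtain ⟨e, rfl⟩ : ∃ e, d = e + 1 := ⟨d - 1, by omega⟩
        rw [s5, if_neg (by omega), tcol_succ]; simp
    rw [hrunval]
    have hlen1 : i < st.1.1.length := by rw [s1.1]; exact hg
    have hrow1 : ((st.1.1.getD i []).length : Int) = ((g.getD i []).length : Int) := by
      exact_mod_cast s1.2 i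
    have hj2x : ((d : Nat) : Int) < ((st.1.1.getD ((i : Nat) : Int).toNat []).length : Int) := by
      simp only [Int.toNat_natCast]
      rw [hrow1]
      omega
    refine ⟨?_, fun k l => ?_, ?_, fun c hc => ?_, ?_⟩
    · exact sameShape_trans (sameShape_pvBump st.1.1 (i : Int) (d : Int) _ (by omega) (by omega)) s1
    · rw [gget_pvBump st.1.1 (i : Int) (d : Int) _ (by omega) (by omega) (by exact_mod_cast hlen1) hj2x, s2 k l]
      by_cases hk : k = i
      · subst hk
        by_cases hl : l = d
        · subst hl
          rw [if_neg (by omega), if_pos ⟨rfl, rfl⟩, if_pos ⟨rfl, by omega⟩]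
          omega
        · by_cases hld : l < d
          · rw [if_pos ⟨rfl, hld⟩, if_neg (by omega), if_pos ⟨rfl, by omega⟩]; omega
          · rw [if_neg (by omega), if_neg (by omega), if_neg (by omega)]; omega
      · rw [if_neg (by omega), if_neg (by omega), if_neg (by omega)]; omega
    · rw [List.length_set]; exact s3
    · rw [getD_set]
      by_cases hcd : c = d
      · subst hcd
        rw [if_pos ⟨rfl, by omega⟩, if_pos (by omega)]
      · rw [if_neg (by omega), s4 c hc]
        by_cases hlt : c < d
        · rw [if_pos hlt, if_pos (by omega)]
        · rw [if_neg hlt, if_neg (by omega)]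
    · rw [if_neg (by omega)]
      simp

-- outer streaming loop: rows 0..e-1
theorem B_outer (D : List (List Int)) (n m : Nat) (mat : List (List Int)) (hn : mat.length = n)
    (hrows : ∀ k : Nat, k < n → m ≤ (mat.getD k []).length) :
    ∀ e : Nat, e ≤ n →
    sameShape ((PySem.List.pyRange 0 (e : Int) 1).foldl (fun st i =>
        ((PySem.List.pyRange 0 (m : Int) 1).foldl (bStep D i) (st, 0)).1)
      (mat, List.replicate m 0)).1 mat ∧
    (∀ k l : Nat, gget ((PySem.List.pyRange 0 (e : Int) 1).foldl (fun st i =>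
        ((PySem.List.pyRange 0 (m : Int) 1).foldl (bStep D i) (st, 0)).1)
      (mat, List.replicate m 0)).1 k l
      = gget mat k l + (if k < e ∧ l < m then tcol D k l else 0)) ∧
    ((PySem.List.pyRange 0 (e : Int) 1).foldl (fun st i =>
        ((PySem.List.pyRange 0 (m : Int) 1).foldl (bStep D i) (st, 0)).1)
      (mat, List.replicate m 0)).2.length = m ∧
    (∀ c : Nat, c < m → ((PySem.List.pyRange 0 (e : Int) 1).foldl (fun st i =>
        ((PySem.List.pyRange 0 (m : Int) 1).foldl (bStep D i) (st, 0)).1)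
      (mat, List.replicate m 0)).2.getD c 0 = csum D e c) := by
  intro e
  induction e with
  | zero =>
    intro _
    rw [PySem.List.pyRange_one_eq_nil (a := 0) (b := ((0 : Nat) : Int)) (by omega)]
    simp only [List.foldl_nil]
    refine ⟨sameShape_refl mat, fun k l => by rw [if_neg (by omega), add_zero],
      List.length_replicate, fun c hc => by rw [getD_replicate_zero, csum_zero]⟩
  | succ e ih =>
    intro he
    obtain ⟨t1, t2, t3, t4⟩ := ih (by omega)
    have hsplit : PySem.List.pyRange 0 ((e + 1 : Nat) : Int) 1
        = PySem.List.pyRange 0 (e : Int) 1 ++ [(e : Int)] := by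
      push_cast
      exact PySem.List.pyRange_one_succ_right (by omega)
    rw [hsplit, List.foldl_append]
    set st := (PySem.List.pyRange 0 (e : Int) 1).foldl (fun st i =>
        ((PySem.List.pyRange 0 (m : Int) 1).foldl (bStep D i) (st, 0)).1)
      (mat, List.replicate m 0) with hst
    simp only [List.foldl_cons, List.foldl_nil]
    have hg : e < st.1.length := by rw [t1.1, hn]; omega
    have hrowE : m ≤ (st.1.getD e []).length := by
      rw [t1.2 e]; exact hrows e (by omega)
    have hin := B_inner D e m st.1 st.2 hg hrowE t3 t4 m (le_refl m)
    simp only [Prod.mk.eta] at hin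
    obtain ⟨u1, u2, u3, u4, _⟩ := hin
    refine ⟨sameShape_trans u1 t1, fun k l => ?_, u3, fun c hc => ?_⟩
    · rw [u2 k l, t2 k l]
      by_cases hk : k = e
      · subst hk
        by_cases hl : l < m
        · rw [if_neg (by omega), if_pos ⟨rfl, hl⟩, if_pos ⟨by omega, hl⟩]; omega
        · rw [if_neg (by omega), if_neg (by omega), if_neg (by omega)]; omega
      · by_cases hke : k < e ∧ l < m
        · rw [if_pos hke, if_neg (by omega), if_pos ⟨by omega, hke.2⟩]; omega
        · rw [if_neg hke, if_neg (by omega), if_neg (by omega)]; omega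
    · rw [u4 c hc, if_pos hc]

-- column-major double indicator sum
theorem double_sum_indicator_col (a b c : Int) (K L : Nat) :
    ((List.range L).map (fun (l' : Nat) =>
      ((List.range K).map (fun (k' : Nat) => if (k' : Int) = a ∧ (l' : Int) = b then c else 0)).sum)).sum
      = if 0 ≤ a ∧ a < (K : Int) ∧ 0 ≤ b ∧ b < (L : Int) then c else 0 := by
  have hin : ∀ l' : Nat, ((List.range K).map (fun (k' : Nat) => if (k' : Int) = a ∧ (l' : Int) = b then c else 0)).sum
      = if (l' : Int) = b then (if 0 ≤ a ∧ a < (K : Int) then c else 0) else 0 := by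
    intro l'
    by_cases h : (l' : Int) = b
    · rw [if_pos h, ← sum_indicator a c K]
      exact congrArg List.sum (List.map_congr_left (fun k' _ => by rw [h]; simp))
    · rw [if_neg h]
      have : ∀ k' : Nat, (if (k' : Int) = a ∧ (l' : Int) = b then c else 0) = 0 := by
        intro k'; rw [if_neg (by tauto)]
      simp [this]
  calc ((List.range L).map (fun (l' : Nat) =>
      ((List.range K).map (fun (k' : Nat) => if (k' : Int) = a ∧ (l' : Int) = b then c else 0)).sum)).sum
      = ((List.range L).map (fun (l' : Nat) =>
        if (l' : Int) = b then (if 0 ≤ a ∧ a < (K : Int) then c else 0) else 0)).sum := by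
        exact congrArg List.sum (List.map_congr_left (fun l' _ => hin l'))
    _ = if 0 ≤ b ∧ b < (L : Int) then (if 0 ≤ a ∧ a < (K : Int) then c else 0) else 0 := sum_indicator ..
    _ = if 0 ≤ a ∧ a < (K : Int) ∧ 0 ≤ b ∧ b < (L : Int) then c else 0 := by split_ifs <;> omega

-- the column-major double prefix sum of delta is dsum
theorem delta_prefix_col (N W : Nat) (hN : 0 < N) (hW : 0 < W) (op : Int × Int × Int × Int × Int) (k l : Nat) :
    ((List.range (l + 1)).map (fun (c' : Nat) =>
      ((List.range (k + 1)).map (fun (r' : Nat) => delta N W op r' c')).sum)).sum = dsum N W op k l := by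
  obtain ⟨v, r1, c1, r2, c2⟩ := op
  have hNi : (0 : Int) < (N : Int) := by exact_mod_cast hN
  have hWi : (0 : Int) < (W : Int) := by exact_mod_cast hW
  have hR1 := PySem.Int.mod_nonneg r1 hNi
  have hR2 := PySem.Int.mod_nonneg (r2 + 1) hNi
  have hC1 := PySem.Int.mod_nonneg c1 hWi
  have hC2 := PySem.Int.mod_nonneg (c2 + 1) hWi
  simp only [delta, dsum]
  calc ((List.range (l + 1)).map (fun (c' : Nat) => ((List.range (k + 1)).map (fun (r' : Nat) =>
        (if (r' : Int) = PySem.Int.mod r1 (N : Int) ∧ (c' : Int) = PySem.Int.mod c1 (W : Int) then v else 0)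
        + (if (r' : Int) = PySem.Int.mod r1 (N : Int) ∧ (c' : Int) = PySem.Int.mod (c2 + 1) (W : Int) then -v else 0)
        + (if (r' : Int) = PySem.Int.mod (r2 + 1) (N : Int) ∧ (c' : Int) = PySem.Int.mod c1 (W : Int) then -v else 0)
        + (if (r' : Int) = PySem.Int.mod (r2 + 1) (N : Int) ∧ (c' : Int) = PySem.Int.mod (c2 + 1) (W : Int) then v else 0))).sum)).sum
      = ((List.range (l + 1)).map (fun (c' : Nat) =>
          ((List.range (k + 1)).map (fun (r' : Nat) => if (r' : Int) = PySem.Int.mod r1 (N : Int) ∧ (c' : Int) = PySem.Int.mod c1 (W : Int) then v else 0)).sum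
          + ((List.range (k + 1)).map (fun (r' : Nat) => if (r' : Int) = PySem.Int.mod r1 (N : Int) ∧ (c' : Int) = PySem.Int.mod (c2 + 1) (W : Int) then -v else 0)).sum
          + ((List.range (k + 1)).map (fun (r' : Nat) => if (r' : Int) = PySem.Int.mod (r2 + 1) (N : Int) ∧ (c' : Int) = PySem.Int.mod c1 (W : Int) then -v else 0)).sum
          + ((List.range (k + 1)).map (fun (r' : Nat) => if (r' : Int) = PySem.Int.mod (r2 + 1) (N : Int) ∧ (c' : Int) = PySem.Int.mod (c2 + 1) (W : Int) then v else 0)).sum)).sum := by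
        refine congrArg List.sum (List.map_congr_left (fun (c' : Nat) _ => ?_))
        simp only [PySem.List.sum_map_add_int]
    _ = ((List.range (l + 1)).map (fun (c' : Nat) =>
          ((List.range (k + 1)).map (fun (r' : Nat) => if (r' : Int) = PySem.Int.mod r1 (N : Int) ∧ (c' : Int) = PySem.Int.mod c1 (W : Int) then v else 0)).sum)).sum
        + ((List.range (l + 1)).map (fun (c' : Nat) =>
          ((List.range (k + 1)).map (fun (r' : Nat) => if (r' : Int) = PySem.Int.mod r1 (N : Int) ∧ (c' : Int) = PySem.Int.mod (c2 + 1) (W : Int) then -v else 0)).sum)).sum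
        + ((List.range (l + 1)).map (fun (c' : Nat) =>
          ((List.range (k + 1)).map (fun (r' : Nat) => if (r' : Int) = PySem.Int.mod (r2 + 1) (N : Int) ∧ (c' : Int) = PySem.Int.mod c1 (W : Int) then -v else 0)).sum)).sum
        + ((List.range (l + 1)).map (fun (c' : Nat) =>
          ((List.range (k + 1)).map (fun (r' : Nat) => if (r' : Int) = PySem.Int.mod (r2 + 1) (N : Int) ∧ (c' : Int) = PySem.Int.mod (c2 + 1) (W : Int) then v else 0)).sum)).sum := by
        simp only [PySem.List.sum_map_add_int]
    _ = (if 0 ≤ PySem.Int.mod r1 (N : Int) ∧ PySem.Int.mod r1 (N : Int) < ((k + 1 : Nat) : Int) ∧ 0 ≤ PySem.Int.mod c1 (W : Int) ∧ PySem.Int.mod c1 (W : Int) < ((l + 1 : Nat) : Int) then v else 0)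
        + (if 0 ≤ PySem.Int.mod r1 (N : Int) ∧ PySem.Int.mod r1 (N : Int) < ((k + 1 : Nat) : Int) ∧ 0 ≤ PySem.Int.mod (c2 + 1) (W : Int) ∧ PySem.Int.mod (c2 + 1) (W : Int) < ((l + 1 : Nat) : Int) then -v else 0)
        + (if 0 ≤ PySem.Int.mod (r2 + 1) (N : Int) ∧ PySem.Int.mod (r2 + 1) (N : Int) < ((k + 1 : Nat) : Int) ∧ 0 ≤ PySem.Int.mod c1 (W : Int) ∧ PySem.Int.mod c1 (W : Int) < ((l + 1 : Nat) : Int) then -v else 0)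
        + (if 0 ≤ PySem.Int.mod (r2 + 1) (N : Int) ∧ PySem.Int.mod (r2 + 1) (N : Int) < ((k + 1 : Nat) : Int) ∧ 0 ≤ PySem.Int.mod (c2 + 1) (W : Int) ∧ PySem.Int.mod (c2 + 1) (W : Int) < ((l + 1 : Nat) : Int) then v else 0) := by
        rw [double_sum_indicator_col, double_sum_indicator_col, double_sum_indicator_col, double_sum_indicator_col]
    _ = (if PySem.Int.mod r1 (N : Int) ≤ (k : Int) ∧ PySem.Int.mod c1 (W : Int) ≤ (l : Int) then v else 0)
        + (if PySem.Int.mod r1 (N : Int) ≤ (k : Int) ∧ PySem.Int.mod (c2 + 1) (W : Int) ≤ (l : Int) then -v else 0)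
        + (if PySem.Int.mod (r2 + 1) (N : Int) ≤ (k : Int) ∧ PySem.Int.mod c1 (W : Int) ≤ (l : Int) then -v else 0)
        + (if PySem.Int.mod (r2 + 1) (N : Int) ≤ (k : Int) ∧ PySem.Int.mod (c2 + 1) (W : Int) ≤ (l : Int) then v else 0) := by
        push_cast
        congr 1
        congr 1
        congr 1
        all_goals split_ifs <;> omega

-- column-major double prefix sum of deltaSum is the sum of dsums
theorem prefpref_col (N W : Nat) (hN : 0 < N) (hW : 0 < W) (opr : List (Int × Int × Int × Int × Int)) (k l : Nat) :
    pref (fun c => pref (fun r => deltaSum N W opr r c) k) l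
      = (opr.map (fun op => dsum N W op k l)).sum := by
  induction opr with
  | nil =>
    have h1 : ∀ c : Nat, pref (fun r => deltaSum N W ([] : List (Int × Int × Int × Int × Int)) r c) k = 0 := by
      intro c
      rw [show pref (fun r => deltaSum N W ([] : List (Int × Int × Int × Int × Int)) r c) k
          = pref (fun _ => (0 : Int)) k from pref_congr (fun r _ => by simp [deltaSum])]
      exact pref_zero_fn k
    rw [show pref (fun c => pref (fun r => deltaSum N W ([] : List (Int × Int × Int × Int × Int)) r c) k) l
        = pref (fun _ => (0 : Int)) l from pref_congr (fun c _ => h1 c), pref_zero_fn]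
    simp
  | cons op ops ih =>
    have hsplit : ∀ c : Nat, pref (fun r => deltaSum N W (op :: ops) r c) k
        = pref (fun r => delta N W op r c) k + pref (fun r => deltaSum N W ops r c) k := by
      intro c
      rw [show pref (fun r => deltaSum N W (op :: ops) r c) k
          = pref (fun r => delta N W op r c + deltaSum N W ops r c) k from
          pref_congr (fun r _ => by simp [deltaSum])]
      exact pref_add ..
    rw [show pref (fun c => pref (fun r => deltaSum N W (op :: ops) r c) k) l
        = pref (fun c => pref (fun r => delta N W op r c) k + pref (fun r => deltaSum N W ops r c) k) l from
        pref_congr (fun c _ => hsplit c), pref_add]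
    rw [ih]
    have hdp : pref (fun c => pref (fun r => delta N W op r c) k) l = dsum N W op k l :=
      delta_prefix_col N W hN hW op k l
    rw [hdp]
    simp

-- B returns mat plus the clipped quadrant sums, cell for cell
theorem alt_cells' (mat : List (List Int)) (opr : List (Int × Int × Int × Int × Int))
    (hrows : ∀ row ∈ mat, (PySem.List.pyGetD mat 0 []).length ≤ row.length)
    (hops : ∀ op ∈ opr,
      -((mat.length : Int) + 2) ≤ op.2.1 ∧ op.2.1 < (mat.length : Int) + 2 ∧
      -((mat.length : Int) + 2) ≤ op.2.2.2.1 + 1 ∧ op.2.2.2.1 + 1 < (mat.length : Int) + 2 ∧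
      -(((PySem.List.pyGetD mat 0 []).length : Int) + 2) ≤ op.2.2.1 ∧
      op.2.2.1 < ((PySem.List.pyGetD mat 0 []).length : Int) + 2 ∧
      -(((PySem.List.pyGetD mat 0 []).length : Int) + 2) ≤ op.2.2.2.2 + 1 ∧
      op.2.2.2.2 + 1 < ((PySem.List.pyGetD mat 0 []).length : Int) + 2) :
    sameShape (applyDiff2D_alt mat opr) mat ∧
    ∀ k l : Nat, gget (applyDiff2D_alt mat opr) k l
      = gget mat k l + oprSum mat.length (PySem.List.pyGetD mat 0 []).length opr k l := by
  have hB : applyDiff2D_alt mat opr = ((PySem.List.pyRange 0 ((mat.length : Nat) : Int) 1).foldl (fun st i =>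
      ((PySem.List.pyRange 0 (((PySem.List.pyGetD mat 0 []).length : Nat) : Int) 1).foldl
        (bStep (opr.foldl (fun g op =>
          match op with
          | (v, r1, c1, r2, c2) =>
            pvBump (pvBump (pvBump (pvBump g r1 c1 v) r1 (c2 + 1) (-v)) (r2 + 1) c1 (-v)) (r2 + 1) (c2 + 1) v)
          (List.replicate (mat.length + 2) (List.replicate ((PySem.List.pyGetD mat 0 []).length + 2) (0 : Int)))) i) (st, 0)).1)
      (mat, List.replicate ((PySem.List.pyGetD mat 0 []).length) (0 : Int))).1 := rfl
  have hops2 : ∀ op ∈ opr,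
      -(((mat.length + 2 : Nat) : Int)) ≤ op.2.1 ∧ op.2.1 < ((mat.length + 2 : Nat) : Int) ∧
      -(((mat.length + 2 : Nat) : Int)) ≤ op.2.2.2.1 + 1 ∧ op.2.2.2.1 + 1 < ((mat.length + 2 : Nat) : Int) ∧
      -((((PySem.List.pyGetD mat 0 []).length + 2 : Nat) : Int)) ≤ op.2.2.1 ∧
      op.2.2.1 < (((PySem.List.pyGetD mat 0 []).length + 2 : Nat) : Int) ∧
      -((((PySem.List.pyGetD mat 0 []).length + 2 : Nat) : Int)) ≤ op.2.2.2.2 + 1 ∧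
      op.2.2.2.2 + 1 < (((PySem.List.pyGetD mat 0 []).length + 2 : Nat) : Int) := by
    intro op hop
    obtain ⟨a1, a2, a3, a4, a5, a6, a7, a8⟩ := hops op hop
    refine ⟨?_, ?_, ?_, ?_, ?_, ?_, ?_, ?_⟩ <;> push_cast <;> omega
  obtain ⟨hU1, hC1⟩ := A_opsLoop (mat.length + 2) ((PySem.List.pyGetD mat 0 []).length + 2) opr hops2
    (List.replicate (mat.length + 2) (List.replicate ((PySem.List.pyGetD mat 0 []).length + 2) (0 : Int))) (Unif_replicate _ _)
  have e1 : ∀ x y : Nat, gget (opr.foldl (fun g op =>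
      match op with
      | (v, r1, c1, r2, c2) =>
        pvBump (pvBump (pvBump (pvBump g r1 c1 v) r1 (c2 + 1) (-v)) (r2 + 1) c1 (-v)) (r2 + 1) (c2 + 1) v)
      (List.replicate (mat.length + 2) (List.replicate ((PySem.List.pyGetD mat 0 []).length + 2) (0 : Int)))) x y
      = deltaSum (mat.length + 2) ((PySem.List.pyGetD mat 0 []).length + 2) opr x y := by
    intro x y
    rw [hC1 x y, gget_replicate, zero_add]
  have hrowsK : ∀ k : Nat, k < mat.length →
      (PySem.List.pyGetD mat 0 []).length ≤ (mat.getD k []).length := by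
    intro k hk
    have hmem : mat.getD k [] ∈ mat := by
      rw [List.getD_eq_getElem mat [] hk]; exact List.getElem_mem hk
    exact hrows _ hmem
  have hout := B_outer (opr.foldl (fun g op =>
      match op with
      | (v, r1, c1, r2, c2) =>
        pvBump (pvBump (pvBump (pvBump g r1 c1 v) r1 (c2 + 1) (-v)) (r2 + 1) c1 (-v)) (r2 + 1) (c2 + 1) v)
      (List.replicate (mat.length + 2) (List.replicate ((PySem.List.pyGetD mat 0 []).length + 2) (0 : Int))))
    mat.length ((PySem.List.pyGetD mat 0 []).length) mat rfl hrowsK mat.length (le_refl _)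
  rw [hB]
  refine ⟨hout.1, fun k l => ?_⟩
  rw [hout.2.1 k l]
  by_cases hin : k < mat.length ∧ l < (PySem.List.pyGetD mat 0 []).length
  · rw [if_pos hin]
    congr 1
    have ht : tcol (opr.foldl (fun g op =>
        match op with
        | (v, r1, c1, r2, c2) =>
          pvBump (pvBump (pvBump (pvBump g r1 c1 v) r1 (c2 + 1) (-v)) (r2 + 1) c1 (-v)) (r2 + 1) (c2 + 1) v)
        (List.replicate (mat.length + 2) (List.replicate ((PySem.List.pyGetD mat 0 []).length + 2) (0 : Int)))) k l
        = pref (fun c => pref (fun r => deltaSum (mat.length + 2) ((PySem.List.pyGetD mat 0 []).length + 2) opr r c) k) l := by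
      unfold tcol csum pref
      exact congrArg List.sum (List.map_congr_left (fun c _ =>
        congrArg List.sum (List.map_congr_left (fun r _ => e1 r c))))
    rw [ht, prefpref_col (mat.length + 2) ((PySem.List.pyGetD mat 0 []).length + 2) (by omega) (by omega) opr k l,
      dsumSum_eq_oprSum mat.length (PySem.List.pyGetD mat 0 []).length opr k l hin.1 hin.2]
  · rw [if_neg hin,
      oprSum_outside mat.length (PySem.List.pyGetD mat 0 []).length opr k l (by omega)]

-- ===== VERDICT (by name: the statement is the Claim_ definition above) =====
theorem applyDiff2D_spec : Claim_equal_applyDiff2D := by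
  intro mat opr _ hPre
  obtain ⟨hne, hrows, hops⟩ := hPre
  obtain ⟨hsA, hcA⟩ := A_spec mat opr hne hrows hops
  obtain ⟨hsB, hcB⟩ := alt_cells' mat opr hrows hops
  unfold Spec_applyDiff2D
  exact matExt _ _ (sameShape_trans hsA ⟨hsB.1.symm, fun k => (hsB.2 k).symm⟩)
    (fun k l => by rw [hcA k l, hcB k l])
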